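-- pv_equiv track=rewrite | github.com/linhdvu14/cp-sols | sols/CodeForces/1689_d2/E_ANDfinity.py | solve
-- ===== SOURCE A (Python) =====
-- class UnionFind:
--     def __init__(self, N):
--         self.N = N
--         self.rank = [1]*N  # for root nodes, height of tree rooted at this node
--         self.parent = list(range(N))
--         self.count = N  # num cc
--
--     def find(self, i):
--         r = i
--         while self.parent[r] != r: r = self.parent[r]
--         # path compression: connect all parents from i..r to r
--         while self.parent[i] != r:
--             p = self.parent[i]
--             self.parent[i] = r
--             i = p
--         return r
--
--     def union(self, i, j):
--         ri, rj = self.find(i), self.find(j)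
--         if ri == rj: return
--         # rank compression: merge small tree to large tree
--         if self.rank[ri] > self.rank[rj]: ri, rj = rj, ri
--         self.parent[ri] = rj
--         self.rank[rj] += self.rank[ri]
--         self.count -= 1
--
--     def get_num_cc(self):
--         return self.count
--
-- BITS = 30
--
-- def solve(N, A):
--     # increment any 0
--     res = 0
--     for i, a in enumerate(A):
--         if a > 0: continue
--         A[i] = 1
--         res += 1
--
--     # connect all bits in a single ele
--     def is_connected(A):
--         if any(a == 0 for a in A): return False
--         bits = set(i for i in range(BITS) if any((a >> i) & 1 for a in A))
--         bits = {b: i for i, b in enumerate(sorted(list(bits)))}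
--         uf = UnionFind(len(bits))
--         for a in A:
--             pi = -1
--             for i in range(BITS):
--                 if (a >> i) & 1:
--                     if pi != -1: uf.union(bits[i], bits[pi])
--                     pi = i
--         return uf.get_num_cc() == 1
--
--     # check if alr connected
--     if is_connected(A): return res, A
--
--     # check if can connect with 1 op
--     for i, a in enumerate(A):
--         A[i] = a - 1
--         if is_connected(A): return res + 1, A
--         A[i] = a + 1
--         if is_connected(A): return res + 1, A
--         A[i] = a
--
--     # find all eles with max lsb
--     mx, idx = -1, []
--     for i, a in enumerate(A):
--         lsb = a & (-a)
--         if lsb > mx: mx, idx = lsb, []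
--         if lsb == mx: idx.append(i)
--
--     A[idx[0]] -= 1
--     if len(idx) == 1: return res + 1, A
--     A[idx[1]] += 1  # connect to idx[0]
--     return res + 2, A
-- ===== SOURCE B (Python) =====
-- BITS = 30
-- _MASK = (1 << BITS) - 1
--
-- def _connected(xs):
--     # connected components of the bit graph, kept as disjoint bitmasks merged in one pass
--     comps = []
--     for a in xs:
--         if a == 0:
--             return False
--         m = a & _MASK
--         if m:
--             acc = m
--             rest = []
--             for c in comps:
--                 if c & acc:
--                     acc |= c
--                 else:
--                     rest.append(c)
--             comps = rest
--             comps.append(acc)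
--     return len(comps) == 1
--
-- def solve(N, A):
--     res = sum(1 for a in A if a <= 0)
--     B = [a if a > 0 else 1 for a in A]
--     if _connected(B):
--         return res, B
--     for i in range(len(B)):
--         cand = B[:i] + [B[i] - 1] + B[i + 1:]
--         if _connected(cand):
--             return res + 1, cand
--         cand = B[:i] + [B[i] + 1] + B[i + 1:]
--         if _connected(cand):
--             return res + 1, cand
--     lsbs = [b & -b for b in B]
--     mx = max(lsbs)
--     idx = [i for i, l in enumerate(lsbs) if l == mx]
--     out = list(B)
--     out[idx[0]] -= 1
--     if len(idx) == 1:
--         return res + 1, out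
--     out[idx[1]] += 1
--     return res + 2, out
-- ===== Notes on version B (the rewrite author's own statement) =====
-- stated objective: faster
-- what changed: The union-find over re-indexed bits inside is_connected is replaced by a single pass that maintains the connected components of the bit graph as a list of disjoint 30-bit masks, merging every component that intersects the current element's mask; the outer phases become a count+map comprehension, slice-built candidates and a max/filter scan instead of in-place mutation and a running fold.
import Mathlib
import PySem

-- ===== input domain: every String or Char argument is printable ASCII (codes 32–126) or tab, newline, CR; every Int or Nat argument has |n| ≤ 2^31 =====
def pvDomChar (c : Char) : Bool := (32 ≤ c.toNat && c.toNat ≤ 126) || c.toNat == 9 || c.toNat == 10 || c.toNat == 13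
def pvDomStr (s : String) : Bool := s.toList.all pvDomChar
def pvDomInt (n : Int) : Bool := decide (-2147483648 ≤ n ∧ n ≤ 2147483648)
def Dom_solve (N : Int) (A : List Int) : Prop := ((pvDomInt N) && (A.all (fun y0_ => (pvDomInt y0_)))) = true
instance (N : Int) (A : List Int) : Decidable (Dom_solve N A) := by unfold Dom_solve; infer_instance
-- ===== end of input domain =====

-- B is a structurally different re-implementation (bitmask component merging instead of a
-- union-find over re-indexed bits); equivalence is about the RETURN value only: Python A
-- mutates the list argument in place, B does not.

-- ===== PORT A =====

-- (a >> i) & 1 as a Bool; exact for the nonnegative values that reach it inside solve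
def pyBit (a : Int) (i : Nat) : Bool := PySem.Int.band (a >>> i) 1 ≠ 0

structure UF where
  n : Nat
  rank : List Nat
  parent : List Nat
  count : Int
deriving Repr, DecidableEq

def UF.init (n : Nat) : UF := ⟨n, List.replicate n 1, List.range n, (n : Int)⟩

-- first while-loop of UnionFind.find; fuel (= #nodes) only makes the loop total
def findRootAux (parent : List Nat) (r : Nat) : Nat → Nat
  | 0 => r
  | f + 1 => if parent.getD r r = r then r else findRootAux parent (parent.getD r r) f

-- second while-loop of UnionFind.find (path compression)
def compressAux (parent : List Nat) (i r : Nat) : Nat → List Nat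
  | 0 => parent
  | f + 1 =>
      if parent.getD i i = r then parent
      else compressAux (parent.set i r) (parent.getD i i) r f

def UF.find (uf : UF) (i : Nat) : Nat × UF :=
  let r := findRootAux uf.parent i uf.parent.length
  (r, { uf with parent := compressAux uf.parent i r uf.parent.length })

def UF.union (uf : UF) (i j : Nat) : UF :=
  let p1 := uf.find i
  let p2 := p1.2.find j
  let ri := p1.1
  let rj := p2.1
  let uf2 := p2.2
  if ri = rj then uf2
  else
    let rr := if uf2.rank.getD ri 0 > uf2.rank.getD rj 0 then (rj, ri) else (ri, rj)
    { uf2 with parent := uf2.parent.set rr.1 rr.2,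
               rank := uf2.rank.set rr.2 (uf2.rank.getD rr.2 0 + uf2.rank.getD rr.1 0),
               count := uf2.count - 1 }

-- is_connected of A: bits present, dict bit -> index, union-find over the indices
def bitsA (L : List Int) : List Nat := (List.range 30).filter (fun i => L.any (fun a => pyBit a i))

-- the dict {b: i for i, b in enumerate(sorted bits)} as an association list, looked up by key
def dgetA (bl : List Nat) (b : Nat) : Nat :=
  ((((bl.zipIdx.map (fun p => (p.1, p.2))).find? (fun p => p.1 == b)).map Prod.snd).getD 0)

-- the inner loop of is_connected: chain-union the bits of one element
def stepA (bl : List Nat) (uf : UF) (a : Int) : UF :=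
  ((List.range 30).foldl
    (fun (s : UF × Int) i =>
      if pyBit a i then
        ((if s.2 ≠ -1 then s.1.union (dgetA bl i) (dgetA bl s.2.toNat) else s.1), (i : Int))
      else s)
    (uf, -1)).1

def isConnA (L : List Int) : Bool :=
  if L.any (fun a => a == 0) then false
  else (L.foldl (stepA (bitsA L)) (UF.init (bitsA L).length)).count == 1

-- first loop of solve: increment any non-positive element to 1, counting the operations
def fixZeros : List Int → Int × List Int
  | [] => (0, [])
  | a :: t =>
      let p := fixZeros t
      if a > 0 then (p.1, a :: p.2) else (p.1 + 1, 1 :: p.2)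

-- second loop of solve: try A[i]-1 then A[i]+1 for each i, first success wins
def searchA (L : List Int) (i : Nat) : Nat → Option (List Int)
  | 0 => none
  | f + 1 =>
      let a := L.getD i 0
      let c1 := L.set i (a - 1)
      if isConnA c1 then some c1
      else
        let c2 := L.set i (a + 1)
        if isConnA c2 then some c2 else searchA L (i + 1) f

-- one step of the running max-lsb scan (mx, idx) of solve's last loop
def lsbStep (s : Int × List Nat) (q : Int × Nat) : Int × List Nat :=
  let lsb := PySem.Int.band q.1 (-q.1)
  let s' := if lsb > s.1 then (lsb, ([] : List Nat)) else s
  if lsb = s'.1 then (s'.1, s'.2 ++ [q.2]) else s'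

def solve (N : Int) (A : List Int) : Int × List Int :=
  let p := fixZeros A
  let res := p.1
  let A1 := p.2
  if isConnA A1 then (res, A1)
  else
    match searchA A1 0 A1.length with
    | some c => (res + 1, c)
    | none =>
      -- find all elements with maximal least significant bit
      let mi := A1.zipIdx.foldl lsbStep (-1, [])
      let idx := mi.2
      let i0 := idx.getD 0 0
      let A2 := A1.set i0 (A1.getD i0 0 - 1)
      if idx.length = 1 then (res + 1, A2)
      else
        let i1 := idx.getD 1 0
        (res + 2, A2.set i1 (A2.getD i1 0 + 1))

-- ===== PORT B =====

def mask30 : Int := (1 <<< 30) - 1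

-- inner pass of _connected: merge every component intersecting the running mask
def mergeStep (comps : List Int) (m : Int) : List Int :=
  (comps.foldl
    (fun (s : Int × List Int) c =>
      if PySem.Int.band c s.1 ≠ 0 then (PySem.Int.bor s.1 c, s.2)
      else (s.1, s.2 ++ [c]))
    (m, [])).2 ++
  [(comps.foldl
    (fun (s : Int × List Int) c =>
      if PySem.Int.band c s.1 ≠ 0 then (PySem.Int.bor s.1 c, s.2)
      else (s.1, s.2 ++ [c]))
    (m, [])).1]

-- _connected of B: none = a zero was seen, otherwise the final component list
def connAux (comps : List Int) : List Int → Option (List Int)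
  | [] => some comps
  | a :: t =>
      if a == 0 then none
      else
        let m := PySem.Int.band a mask30
        if m = 0 then connAux comps t
        else connAux (mergeStep comps m) t

def connB (xs : List Int) : Bool :=
  match connAux [] xs with
  | none => false
  | some comps => comps.length == 1

def searchB (L : List Int) (i : Nat) : Nat → Option (List Int)
  | 0 => none
  | f + 1 =>
      let c1 := L.take i ++ [L.getD i 0 - 1] ++ L.drop (i + 1)
      if connB c1 then some c1
      else
        let c2 := L.take i ++ [L.getD i 0 + 1] ++ L.drop (i + 1)
        if connB c2 then some c2 else searchB L (i + 1) f

def solve_alt (N : Int) (A : List Int) : Int × List Int :=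
  let res : Int := ((A.filter (fun a => a ≤ 0)).length : Int)
  let B := A.map (fun a => if a > 0 then a else 1)
  if connB B then (res, B)
  else
    match searchB B 0 B.length with
    | some c => (res + 1, c)
    | none =>
      let lsbs := B.map (fun b => PySem.Int.band b (-b))
      let mx := (PySem.List.max? lsbs (fun x => x)).getD 0
      let idx := (lsbs.zipIdx.filter (fun q => q.1 == mx)).map Prod.snd
      let i0 := idx.getD 0 0
      let out := B.set i0 (B.getD i0 0 - 1)
      if idx.length == 1 then (res + 1, out)
      else
        let i1 := idx.getD 1 0
        (res + 2, out.set i1 (out.getD i1 0 + 1))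

-- ===== PRECONDITION & SPEC =====
-- Pre_ excludes only the empty list, on which Python A raises IndexError (idx[0] of an empty list).
def Pre_solve (N : Int) (A : List Int) : Prop := A ≠ []
instance (N : Int) (A : List Int) : Decidable (Pre_solve N A) := by unfold Pre_solve; infer_instance
def pvWitness_solve : Int × List Int := (3, [5, 3])

def Spec_solve (N : Int) (A : List Int) (out : Int × List Int) : Prop := out = solve_alt N A
instance (N : Int) (A : List Int) (out : Int × List Int) : Decidable (Spec_solve N A out) := by unfold Spec_solve; infer_instance

-- ===== CLAIM (what is proved, stated in full; the proofs are below) =====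
def Claim_equal_solve : Prop := ∀ (N : Int) (A : List Int), Dom_solve N A → Pre_solve N A → Spec_solve N A (solve N A)

-- ===== LEMMAS AND PROOFS =====

def pget (p : List Nat) (x : Nat) : Nat := p.getD x x

def rootP (p : List Nat) (x : Nat) : Nat := findRootAux p x p.length

def BoundsP (p : List Nat) : Prop := ∀ x, x < p.length → pget p x < p.length

def ReachP (p : List Nat) (x : Nat) : Prop :=
  ∃ f, pget p (findRootAux p x f) = findRootAux p x f

def ForestP (p : List Nat) : Prop := BoundsP p ∧ ∀ x, ReachP p x

theorem findRootAux_of_isRoot (p : List Nat) (r : Nat) (h : pget p r = r) :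
    ∀ f, findRootAux p r f = r := by
  intro f
  induction f with
  | zero => rfl
  | succ f ih =>
    simp only [pget] at h
    rw [findRootAux, if_pos h]

theorem findRootAux_succ (p : List Nat) (x : Nat) (f : Nat) (h : pget p x ≠ x) :
    findRootAux p x (f + 1) = findRootAux p (pget p x) f := by
  simp only [pget] at h
  rw [findRootAux, if_neg h]
  rfl

theorem findRootAux_stab (p : List Nat) :
    ∀ (f : Nat) (x g : Nat), pget p (findRootAux p x f) = findRootAux p x f → f ≤ g →
      findRootAux p x g = findRootAux p x f := by
  intro f
  induction f with
  | zero =>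
    intro x g h _
    simp only [findRootAux] at h ⊢
    exact findRootAux_of_isRoot p x h g
  | succ f ih =>
    intro x g h hg
    by_cases hx : pget p x = x
    · rw [findRootAux_of_isRoot p x hx, findRootAux_of_isRoot p x hx]
    · obtain ⟨g', rfl⟩ : ∃ g', g = g' + 1 := ⟨g - 1, by omega⟩
      rw [findRootAux_succ p x g' hx, findRootAux_succ p x f hx]
      rw [findRootAux_succ p x f hx] at h
      exact ih (pget p x) g' h (by omega)

theorem findRootAux_lt (p : List Nat) (hB : BoundsP p) :
    ∀ (f x : Nat), x < p.length → findRootAux p x f < p.length := by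
  intro f
  induction f with
  | zero => intro x hx; exact hx
  | succ f ih =>
    intro x hx
    by_cases hx' : pget p x = x
    · rw [findRootAux_of_isRoot p x hx']; exact hx
    · rw [findRootAux_succ p x f hx']; exact ih _ (hB x hx)

-- the walk: before reaching a root, findRootAux steps through pget
theorem findRootAux_step_of_not_root (p : List Nat) :
    ∀ (f x : Nat), pget p (findRootAux p x f) ≠ findRootAux p x f →
      findRootAux p x (f + 1) = pget p (findRootAux p x f) := by
  intro f
  induction f with
  | zero =>
    intro x h
    simp only [findRootAux] at h ⊢
    simp only [pget] at h ⊢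
    rw [if_neg h]
  | succ f ih =>
    intro x h
    by_cases hx : pget p x = x
    · rw [findRootAux_of_isRoot p x hx] at h ⊢; exact absurd hx h
    · have e2 : findRootAux p x (f + 1) = findRootAux p (pget p x) f :=
        findRootAux_succ p x f hx
      have e1 : findRootAux p x (f + 1 + 1) = findRootAux p (pget p x) (f + 1) :=
        findRootAux_succ p x (f + 1) hx
      rw [e2] at h
      rw [e1, e2]
      exact ih (pget p x) h

-- pigeonhole: if the walk ever reaches a root, it does so within p.length steps
theorem reachBound (p : List Nat) (hB : BoundsP p) (x : Nat) (hR : ReachP p x) :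
    pget p (rootP p x) = rootP p x := by
  classical
  by_cases hx : x < p.length
  · -- minimal fuel reaching a root
    have hex : ∃ f, pget p (findRootAux p x f) = findRootAux p x f := hR
    set f0 := Nat.find hex with hf0
    have hroot : pget p (findRootAux p x f0) = findRootAux p x f0 := Nat.find_spec hex
    by_cases hle : f0 ≤ p.length
    · unfold rootP
      rw [findRootAux_stab p f0 x p.length hroot hle]
      exact hroot
    · exfalso
      have hle : p.length < f0 := by omega
      -- walk values w t := findRootAux p x t, t ≤ p.length, are distinct and < length
      have hnr : ∀ t, t < f0 → pget p (findRootAux p x t) ≠ findRootAux p x t := by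
        intro t ht; exact Nat.find_min hex ht
      have hwlt : ∀ t, findRootAux p x t < p.length := fun t => findRootAux_lt p hB t x hx
      have hshift : ∀ s t, s < t → t ≤ p.length →
          findRootAux p x s = findRootAux p x t → False := by
        intro s t hst htl heq
        -- propagate equality: ∀ j, s+j ≤ f0 - (t-s) → w (s+j) = w (t+j)
        have hprop : ∀ j, t + j ≤ f0 → findRootAux p x (s + j) = findRootAux p x (t + j) := by
          intro j
          induction j with
          | zero => intro _; simpa using heq
          | succ j ih =>
            intro hj
            have h1 := ih (by omega)
            have hs' : s + j < f0 := by omega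
            have ht' : t + j < f0 := by omega
            have := findRootAux_step_of_not_root p (s+j) x (hnr _ hs')
            have h2 := findRootAux_step_of_not_root p (t+j) x (hnr _ ht')
            rw [show s + (j+1) = (s+j) + 1 by omega, show t + (j+1) = (t+j) + 1 by omega,
              this, h2, h1]
        -- then w (f0 - (t - s)) = w f0 is a root earlier than f0
        have hkey := hprop (f0 - t) (by omega)
        have h1 : s + (f0 - t) < f0 := by omega
        have h2 : t + (f0 - t) = f0 := by omega
        rw [h2] at hkey
        exact hnr _ h1 (by rw [hkey]; exact hroot)
      -- injectivity on range (length+1) into range length: pigeonhole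
      have hinj : Set.InjOn (fun t => findRootAux p x t) (Finset.range (p.length + 1)) := by
        intro s hs t ht h
        simp only [Finset.coe_range, Set.mem_Iio] at hs ht
        rcases lt_trichotomy s t with h'|h'|h'
        · exact absurd (hshift s t h' (by omega) h) (by simp)
        · exact h'
        · exact absurd (hshift t s h' (by omega) h.symm) (by simp)
      have hcard := Finset.card_le_card_of_injOn (fun t => findRootAux p x t)
        (fun t _ => Finset.mem_range.mpr (hwlt t)) hinj
      simp at hcard
  · -- x out of range: immediately a root
    have hx' : pget p x = x := by
      unfold pget
      rw [List.getD_eq_default]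
      omega
    unfold rootP
    rw [findRootAux_of_isRoot p x hx']
    exact hx'

theorem rootP_isRoot (p : List Nat) (hF : ForestP p) (x : Nat) :
    pget p (rootP p x) = rootP p x := reachBound p hF.1 x (hF.2 x)

theorem root_stab (p : List Nat) (hB : BoundsP p) (f x : Nat)
    (h : pget p (findRootAux p x f) = findRootAux p x f) :
    findRootAux p x f = rootP p x := by
  by_cases hle : f ≤ p.length
  · unfold rootP
    rw [findRootAux_stab p f x p.length h hle]
  · have hR : ReachP p x := ⟨f, h⟩
    have hr := reachBound p hB x hR
    unfold rootP at hr ⊢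
    exact findRootAux_stab p p.length x f hr (by omega)

theorem rootP_of_isRoot (p : List Nat) (x : Nat) (h : pget p x = x) : rootP p x = x :=
  findRootAux_of_isRoot p x h p.length

theorem rootP_step (p : List Nat) (hF : ForestP p) (x : Nat) (h : pget p x ≠ x) :
    rootP p x = rootP p (pget p x) := by
  have h1 : findRootAux p x (p.length + 1) = findRootAux p (pget p x) p.length :=
    findRootAux_succ p x p.length h
  have h2 : pget p (findRootAux p (pget p x) p.length) = findRootAux p (pget p x) p.length :=
    rootP_isRoot p hF (pget p x)
  have h3 : pget p (findRootAux p x (p.length + 1)) = findRootAux p x (p.length + 1) := by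
    rw [h1]; exact h2
  rw [← root_stab p hF.1 (p.length + 1) x h3, h1]
  rfl

theorem rootP_lt (p : List Nat) (hB : BoundsP p) (x : Nat) (hx : x < p.length) :
    rootP p x < p.length := findRootAux_lt p hB p.length x hx

theorem findRootAux_unfold (p : List Nat) (x f : Nat) :
    findRootAux p x (f + 1) = if pget p x = x then x else findRootAux p (pget p x) f := rfl

theorem pget_set (p : List Nat) (i r x : Nat) (hi : i < p.length) :
    pget (p.set i r) x = if x = i then r else pget p x := by
  unfold pget List.getD
  by_cases hxi : x = i
  · subst hxi
    rw [List.getElem?_set_self (by omega)]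
    simp
  · rw [List.getElem?_set_ne (by omega : i ≠ x)]
    simp [hxi]

-- the key reparenting lemma: set parent[i] := r where r is a root and either i is a root
-- (union) or r is i's root (path compression); classes merge the obvious way
theorem reparent (p : List Nat) (i r : Nat) (hF : ForestP p) (hi : i < p.length)
    (hrlt : r < p.length) (hr : pget p r = r) (hcase : pget p i = i ∨ r = rootP p i) :
    ForestP (p.set i r) ∧
      ∀ x, rootP (p.set i r) x = if rootP p x = rootP p i then r else rootP p x := by
  set p' := p.set i r with hp'
  have hlen : p'.length = p.length := by simp [hp']
  have hpget : ∀ x, pget p' x = if x = i then r else pget p x := fun x => pget_set p i r x hi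
  have hB' : BoundsP p' := by
    intro x hx
    rw [hlen] at hx
    rw [hpget x, hlen]
    by_cases hxi : x = i
    · simp [hxi, hrlt]
    · simp only [if_neg hxi]
      exact hF.1 x hx
  -- terminal case: x = i with the new parent r ≠ i
  have caseI : r ≠ i → ReachP p' i ∧
      rootP p' i = if rootP p i = rootP p i then r else rootP p i := by
    intro hrne
    have hroot' : pget p' r = r := by rw [hpget r, if_neg hrne]; exact hr
    have h1 : findRootAux p' i 1 = r := by
      rw [findRootAux_unfold]
      rw [if_neg (by rw [hpget i, if_pos rfl]; exact hrne)]
      rw [hpget i, if_pos rfl]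
      exact findRootAux_of_isRoot p' r hroot' 0
    have hstab : pget p' (findRootAux p' i 1) = findRootAux p' i 1 := by rw [h1]; exact hroot'
    refine ⟨⟨1, hstab⟩, ?_⟩
    rw [if_pos rfl, ← root_stab p' hB' 1 i hstab, h1]
  -- terminal case: x a root of p
  have rootCase : ∀ x, pget p x = x → ReachP p' x ∧
      rootP p' x = if rootP p x = rootP p i then r else rootP p x := by
    intro x hx
    have hrx : rootP p x = x := rootP_of_isRoot p x hx
    by_cases hxi : x = i
    · subst hxi
      by_cases hre : r = x
      · have hroot' : pget p' x = x := by rw [hpget x, if_pos rfl, hre]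
        refine ⟨⟨0, hroot'⟩, ?_⟩
        rw [rootP_of_isRoot p' x hroot', if_pos rfl, hre]
      · exact caseI hre
    · have hroot' : pget p' x = x := by rw [hpget x, if_neg hxi]; exact hx
      refine ⟨⟨0, hroot'⟩, ?_⟩
      rw [rootP_of_isRoot p' x hroot']
      by_cases hcond : rootP p x = rootP p i
      · rw [if_pos hcond]
        rcases hcase with hc | hc
        · exfalso
          rw [rootP_of_isRoot p i hc] at hcond
          rw [hrx] at hcond
          exact hxi hcond
        · rw [hc, ← hcond, hrx]
      · rw [if_neg hcond]
        exact hrx.symm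
  have main : ∀ (f x : Nat), pget p (findRootAux p x f) = findRootAux p x f →
      ReachP p' x ∧ rootP p' x = if rootP p x = rootP p i then r else rootP p x := by
    intro f
    induction f with
    | zero =>
      intro x hx
      exact rootCase x hx
    | succ f ih =>
      intro x hx
      by_cases hroot : pget p x = x
      · exact rootCase x hroot
      · rw [findRootAux_succ p x f hroot] at hx
        by_cases hxi : x = i
        · subst hxi
          have hrne : r ≠ x := by
            intro hre
            rcases hcase with hc | hc
            · exact hroot hc
            · have h2 := rootP_isRoot p hF x
              rw [← hc, hre] at h2
              exact hroot h2
          have h := caseI hrne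
          rwa [if_pos rfl, ← (by rw [if_pos rfl] :
            (if rootP p x = rootP p x then r else rootP p x) = r)] at h
        · obtain ⟨⟨g, hg⟩, hval⟩ := ih (pget p x) hx
          have hpx : pget p' x = pget p x := by rw [hpget x, if_neg hxi]
          have hnr' : pget p' x ≠ x := by rw [hpx]; exact hroot
          have hstep : findRootAux p' x (g + 1) = findRootAux p' (pget p x) g := by
            rw [findRootAux_unfold, if_neg hnr', hpx]
          have hg' : pget p' (findRootAux p' x (g + 1)) = findRootAux p' x (g + 1) := by
            rw [hstep]; exact hg
          refine ⟨⟨g + 1, hg'⟩, ?_⟩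
          rw [← root_stab p' hB' (g + 1) x hg', hstep, root_stab p' hB' g (pget p x) hg, hval,
            rootP_step p hF x hroot]
  refine ⟨⟨hB', fun x => ?_⟩, fun x => ?_⟩
  · obtain ⟨f, hf⟩ := hF.2 x
    exact (main f x hf).1
  · obtain ⟨f, hf⟩ := hF.2 x
    exact (main f x hf).2

def ncls (p : List Nat) : Nat := ((Finset.range p.length).image (rootP p)).card

theorem ncls_congr (p q : List Nat) (hl : p.length = q.length)
    (h : ∀ x, rootP p x = rootP q x) : ncls p = ncls q := by
  unfold ncls
  rw [hl, Finset.image_congr (fun x _ => h x)]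

theorem compress_spec : ∀ (f : Nat) (p : List Nat) (i r : Nat), ForestP p → r = rootP p i →
    (compressAux p i r f).length = p.length ∧ ForestP (compressAux p i r f) ∧
      ∀ x, rootP (compressAux p i r f) x = rootP p x := by
  intro f
  induction f with
  | zero => intro p i r hF _; exact ⟨rfl, hF, fun _ => rfl⟩
  | succ f ih =>
    intro p i r hF hr
    simp only [compressAux]
    by_cases hc : p.getD i i = r
    · rw [if_pos hc]
      exact ⟨rfl, hF, fun _ => rfl⟩
    · rw [if_neg hc]
      have hgd : p.getD i i = pget p i := rfl
      rw [hgd]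
      have hpgi : pget p i ≠ r := hc
      have hii : i < p.length := by
        by_contra hni
        have : pget p i = i := by
          unfold pget
          rw [List.getD_eq_default]
          omega
        rw [this] at hpgi
        rw [hr, rootP_of_isRoot p i this] at hpgi
        exact hpgi rfl
      have hini : pget p i ≠ i := by
        intro hpi
        rw [hpi] at hpgi
        rw [hr, rootP_of_isRoot p i hpi] at hpgi
        exact hpgi rfl
      have hrroot : pget p r = r := by rw [hr]; exact rootP_isRoot p hF i
      have hrlt : r < p.length := by rw [hr]; exact rootP_lt p hF.1 i hii
      obtain ⟨hF', hroots⟩ := reparent p i r hF hii hrlt hrroot (Or.inr hr)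
      have hroots' : ∀ x, rootP (p.set i r) x = rootP p x := by
        intro x
        rw [hroots x]
        by_cases hcx : rootP p x = rootP p i
        · rw [if_pos hcx, hr, hcx]
        · rw [if_neg hcx]
      have hrnew : r = rootP (p.set i r) (pget p i) := by
        rw [hroots' (pget p i), ← rootP_step p hF i hini, hr]
      obtain ⟨hl2, hF2, hroots2⟩ := ih (p.set i r) (pget p i) r hF' hrnew
      refine ⟨by rw [hl2]; simp, hF2, fun x => ?_⟩
      rw [hroots2 x, hroots' x]

theorem find_spec (uf : UF) (i : Nat) (hF : ForestP uf.parent) :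
    (uf.find i).1 = rootP uf.parent i ∧ (uf.find i).2.n = uf.n ∧
      (uf.find i).2.rank = uf.rank ∧ (uf.find i).2.count = uf.count ∧
      (uf.find i).2.parent.length = uf.parent.length ∧ ForestP (uf.find i).2.parent ∧
      ∀ x, rootP (uf.find i).2.parent x = rootP uf.parent x := by
  obtain ⟨h1, h2, h3⟩ := compress_spec uf.parent.length uf.parent i
    (findRootAux uf.parent i uf.parent.length) hF rfl
  exact ⟨rfl, rfl, rfl, rfl, h1, h2, h3⟩

theorem ncls_merge (p' p : List Nat) (a b : Nat) (hl : p'.length = p.length)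
    (h : ∀ x, rootP p' x = if rootP p x = a then b else rootP p x)
    (hab : a ≠ b) (ha : a < p.length) (hb : b < p.length)
    (hra : rootP p a = a) (hrb : rootP p b = b) : ncls p' = ncls p - 1 := by
  unfold ncls
  rw [hl]
  have h2 : (Finset.range p.length).image (rootP p') =
      ((Finset.range p.length).image (rootP p)).image (fun t => if t = a then b else t) := by
    rw [Finset.image_image]
    exact Finset.image_congr (fun x _ => by
      rw [h x]
      by_cases hc : rootP p x = a
      · simp [hc]
      · simp [Function.comp, hc])
  set T := (Finset.range p.length).image (rootP p) with hT
  have haT : a ∈ T := Finset.mem_image.mpr ⟨a, Finset.mem_range.mpr ha, hra⟩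
  have hbT : b ∈ T := Finset.mem_image.mpr ⟨b, Finset.mem_range.mpr hb, hrb⟩
  have h3 : T.image (fun t => if t = a then b else t) = insert b (T.erase a) := by
    conv_lhs => rw [← Finset.insert_erase haT]
    rw [Finset.image_insert]
    congr 1
    · exact if_pos rfl
    · rw [Finset.image_congr (fun x hx => if_neg (Finset.ne_of_mem_erase hx))]; exact Finset.image_id
  have hbe : b ∈ T.erase a := Finset.mem_erase.mpr ⟨Ne.symm hab, hbT⟩
  rw [h2, h3, Finset.insert_eq_self.mpr hbe, Finset.card_erase_of_mem haT]

theorem ncls_pos (p : List Nat) (x : Nat) (hx : x < p.length) : 1 ≤ ncls p := by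
  unfold ncls
  apply Finset.card_pos.mpr
  exact ⟨rootP p x, Finset.mem_image.mpr ⟨x, Finset.mem_range.mpr hx, rfl⟩⟩

theorem union_spec (uf : UF) (i j : Nat) (hF : ForestP uf.parent)
    (hc : uf.count = (ncls uf.parent : Int)) (hi : i < uf.parent.length)
    (hj : j < uf.parent.length) :
    (uf.union i j).n = uf.n ∧ (uf.union i j).parent.length = uf.parent.length ∧
      ForestP (uf.union i j).parent ∧ (uf.union i j).count = (ncls (uf.union i j).parent : Int) ∧
      ∃ rr, (rr = rootP uf.parent i ∨ rr = rootP uf.parent j) ∧ ∀ x, rootP (uf.union i j).parent x =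
        if rootP uf.parent x = rootP uf.parent i ∨ rootP uf.parent x = rootP uf.parent j
        then rr else rootP uf.parent x := by
  set p := uf.parent with hp
  obtain ⟨e1, e2, e3, e4, e5, hF1, hroots1⟩ := find_spec uf i hF
  set uf1 := (uf.find i).2 with huf1
  obtain ⟨f1, f2, f3, f4, f5, hF2, hroots2⟩ := find_spec uf1 j hF1
  set uf2 := (uf1.find j).2 with huf2
  set ri := (uf.find i).1 with hri
  set rj := (uf1.find j).1 with hrj
  have hri' : ri = rootP p i := e1
  have hrj' : rj = rootP p j := f1.trans (hroots1 j)
  have hroots12 : ∀ x, rootP uf2.parent x = rootP p x := fun x => by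
    rw [hroots2 x, hroots1 x]
  have hlen2 : uf2.parent.length = p.length := by rw [f5, e5]
  have hunion : uf.union i j =
      (if ri = rj then uf2
       else
         let rr := if uf2.rank.getD ri 0 > uf2.rank.getD rj 0 then (rj, ri) else (ri, rj)
         { uf2 with parent := uf2.parent.set rr.1 rr.2,
                    rank := uf2.rank.set rr.2 (uf2.rank.getD rr.2 0 + uf2.rank.getD rr.1 0),
                    count := uf2.count - 1 }) := rfl
  by_cases heq : ri = rj
  · rw [hunion, if_pos heq]
    refine ⟨by rw [f2, e2], hlen2, hF2, ?_, ⟨ri, Or.inl hri', fun x => ?_⟩⟩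
    · rw [f4, e4, hc, ncls_congr uf2.parent p hlen2 hroots12]
    · rw [hroots12 x]
      by_cases hcx : rootP p x = rootP p i ∨ rootP p x = rootP p j
      · rw [if_pos hcx]
        rcases hcx with hcx | hcx
        · rw [hcx, hri']
        · rw [hcx, ← hrj', ← heq, hri']
          -- goal: rootP p x = ri rewritten via hcx; adjust
          
      · rw [if_neg hcx]
  · rw [hunion, if_neg heq]
    simp only []
    set ab := if uf2.rank.getD ri 0 > uf2.rank.getD rj 0 then (rj, ri) else (ri, rj) with hab
    have habmem : (ab.1 = ri ∧ ab.2 = rj) ∨ (ab.1 = rj ∧ ab.2 = ri) := by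
      rw [hab]
      by_cases hcr : uf2.rank.getD ri 0 > uf2.rank.getD rj 0
      · rw [if_pos hcr]; right; exact ⟨rfl, rfl⟩
      · rw [if_neg hcr]; left; exact ⟨rfl, rfl⟩
    have hroot_ri : pget uf2.parent ri = ri := by
      have := rootP_isRoot uf2.parent hF2 i
      rwa [hroots12 i, ← hri'] at this
    have hroot_rj : pget uf2.parent rj = rj := by
      have := rootP_isRoot uf2.parent hF2 j
      rwa [hroots12 j, ← hrj'] at this
    have hrilt : ri < uf2.parent.length := by
      rw [hlen2, hri']; exact rootP_lt p hF.1 i hi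
    have hrjlt : rj < uf2.parent.length := by
      rw [hlen2, hrj']; exact rootP_lt p hF.1 j hj
    have hcount2 : uf2.count = (ncls uf2.parent : Int) := by
      rw [f4, e4, hc, ncls_congr uf2.parent p hlen2 hroots12]
    have hn1 : 1 ≤ ncls uf2.parent := ncls_pos uf2.parent i (by rw [hlen2]; exact hi)
    have key : ∀ a b : Nat, a ≠ b → pget uf2.parent a = a → pget uf2.parent b = b →
        a < uf2.parent.length → b < uf2.parent.length →
        (a = ri ∧ b = rj ∨ a = rj ∧ b = ri) →
        (uf2.parent.set a b).length = uf.parent.length ∧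
        ForestP (uf2.parent.set a b) ∧
        (uf2.count - 1 = (ncls (uf2.parent.set a b) : Int)) ∧
        ∀ x, rootP (uf2.parent.set a b) x =
          if rootP uf.parent x = rootP uf.parent i ∨ rootP uf.parent x = rootP uf.parent j
          then b else rootP uf.parent x := by
      intro a b hne hra hrb halt hblt hcase
      obtain ⟨hF3, hroots3⟩ := reparent uf2.parent a b hF2 halt hblt hrb (Or.inl hra)
      have hr2a : rootP uf2.parent a = a := rootP_of_isRoot uf2.parent a hra
      have hr2b : rootP uf2.parent b = b := rootP_of_isRoot uf2.parent b hrb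
      have hroots3' : ∀ x, rootP (uf2.parent.set a b) x =
          if rootP uf2.parent x = a then b else rootP uf2.parent x := by
        intro x; rw [hroots3 x, hr2a]
      have hlen3 : (uf2.parent.set a b).length = uf.parent.length := by
        rw [List.length_set, hlen2]
      refine ⟨hlen3, hF3, ?_, fun x => ?_⟩
      · have hm := ncls_merge (uf2.parent.set a b) uf2.parent a b (by rw [List.length_set])
          hroots3' hne halt hblt hr2a hr2b
        rw [hm, hcount2]
        omega
      · rw [hroots3' x, hroots12 x]
        have hset : (rootP p x = ri ∨ rootP p x = rj) ↔
            (rootP p x = rootP uf.parent i ∨ rootP p x = rootP uf.parent j) := by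
          rw [← hri', ← hrj']
        by_cases hxa : rootP p x = a
        · rw [if_pos hxa, if_pos (hset.mp (by rcases hcase with ⟨h1, _⟩ | ⟨h1, _⟩ <;>
            rw [← h1] <;> [left; right] <;> exact hxa))]
        · rw [if_neg hxa]
          by_cases hxb : rootP p x = b
          · rw [if_pos (hset.mp (by rcases hcase with ⟨_, h2⟩ | ⟨_, h2⟩ <;>
              rw [← h2] <;> [right; left] <;> exact hxb)), hxb]
          · rw [if_neg (fun hcon => by
              rcases hset.mpr hcon with h | h
              · rcases hcase with ⟨h1, _⟩ | ⟨_, h2⟩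
                · exact hxa (by rw [h, h1])
                · exact hxb (by rw [h, h2])
              · rcases hcase with ⟨_, h2⟩ | ⟨h1, _⟩
                · exact hxb (by rw [h, h2])
                · exact hxa (by rw [h, h1]))]
    rcases habmem with ⟨ha1, ha2⟩ | ⟨ha1, ha2⟩
    · obtain ⟨k1, k2, k3, k4⟩ := key ab.1 ab.2 (by rw [ha1, ha2]; exact heq)
        (by rw [ha1]; exact hroot_ri) (by rw [ha2]; exact hroot_rj)
        (by rw [ha1]; exact hrilt) (by rw [ha2]; exact hrjlt)
        (Or.inl ⟨ha1, ha2⟩)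
      exact ⟨by rw [f2, e2], k1, k2, by rw [← k3, f4, e4], ⟨ab.2, Or.inr (ha2 ▸ hrj'), k4⟩⟩
    · obtain ⟨k1, k2, k3, k4⟩ := key ab.1 ab.2 (by rw [ha1, ha2]; exact Ne.symm heq)
        (by rw [ha1]; exact hroot_rj) (by rw [ha2]; exact hroot_ri)
        (by rw [ha1]; exact hrjlt) (by rw [ha2]; exact hrilt)
        (Or.inr ⟨ha1, ha2⟩)
      exact ⟨by rw [f2, e2], k1, k2, by rw [← k3, f4, e4], ⟨ab.2, Or.inl (ha2 ▸ hri'), k4⟩⟩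


-- ===== bit-level bridges =====

def tb (m : Int) (j : Nat) : Bool := m.toNat.testBit j

theorem pyBit_eq_testBit (a : Int) (h : 0 ≤ a) (i : Nat) : pyBit a i = a.toNat.testBit i := by
  unfold pyBit
  obtain ⟨n, rfl⟩ := Int.eq_ofNat_of_zero_le h
  rw [show ((n : Int) >>> i) = ((n >>> i : Nat) : Int) from (Int.natCast_shiftRight n i).symm]
  rw [show (1 : Int) = ((1 : Nat) : Int) from rfl, PySem.Int.band_natCast]
  rw [Int.toNat_natCast]
  rw [show n.testBit i = ((n >>> i) &&& 1 == 1) from by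
    simp [Nat.testBit, Nat.one_and_eq_mod_two, Nat.mod_two_bne_zero, Nat.and_one_is_mod]]
  have hmod : (n >>> i) &&& 1 = (n >>> i) % 2 := Nat.and_one_is_mod _
  rcases Nat.mod_two_eq_zero_or_one (n >>> i) with h2 | h2 <;> simp [hmod, h2]

theorem band_nn (a b : Int) (ha : 0 ≤ a) (hb : 0 ≤ b) : 0 ≤ PySem.Int.band a b := by
  rw [PySem.Int.band_of_nonneg ha hb]; exact Int.natCast_nonneg _

theorem bor_nn (a b : Int) (ha : 0 ≤ a) (hb : 0 ≤ b) : 0 ≤ PySem.Int.bor a b := by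
  rw [PySem.Int.bor_of_nonneg ha hb]; exact Int.natCast_nonneg _

theorem tb_band (a b : Int) (ha : 0 ≤ a) (hb : 0 ≤ b) (j : Nat) :
    tb (PySem.Int.band a b) j = (tb a j && tb b j) := by
  unfold tb
  rw [PySem.Int.band_of_nonneg ha hb, Int.toNat_natCast, Nat.testBit_and]

theorem tb_bor (a b : Int) (ha : 0 ≤ a) (hb : 0 ≤ b) (j : Nat) :
    tb (PySem.Int.bor a b) j = (tb a j || tb b j) := by
  unfold tb
  rw [PySem.Int.bor_of_nonneg ha hb, Int.toNat_natCast, Nat.testBit_or]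

theorem band_eq_zero_iff (a b : Int) (ha : 0 ≤ a) (hb : 0 ≤ b) :
    PySem.Int.band a b = 0 ↔ ∀ j, ¬(tb a j = true ∧ tb b j = true) := by
  rw [PySem.Int.band_of_nonneg ha hb]
  unfold tb
  constructor
  · intro h j ⟨h1, h2⟩
    have : (a.toNat &&& b.toNat) = 0 := by exact_mod_cast h
    have := congrArg (fun x => x.testBit j) this
    simp [Nat.testBit_and, h1, h2] at this
  · intro h
    have : a.toNat &&& b.toNat = 0 := by
      apply Nat.zero_of_testBit_eq_false
      intro j
      rw [Nat.testBit_and]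
      have := h j
      by_cases h1 : a.toNat.testBit j <;> by_cases h2 : b.toNat.testBit j <;> simp_all
    rw [this]; rfl

theorem tb_exists_of_ne (a : Int) (ha : 0 ≤ a) (hne : a ≠ 0) : ∃ j, tb a j = true := by
  by_contra hc
  push_neg at hc
  have : a.toNat = 0 := Nat.zero_of_testBit_eq_false (fun j => by
    have := hc j; unfold tb at this; simpa using this)
  omega

theorem mask30_val : mask30 = ((1073741823 : Nat) : Int) := by decide

theorem tb_mask (a : Int) (h : 0 ≤ a) (j : Nat) :
    tb (PySem.Int.band a mask30) j = (a.toNat.testBit j && decide (j < 30)) := by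
  rw [mask30_val, tb_band a _ h (Int.natCast_nonneg _), ]
  congr 1
  unfold tb
  rw [Int.toNat_natCast, show (1073741823 : Nat) = 2 ^ 30 - 1 by norm_num,
    Nat.testBit_two_pow_sub_one]

-- ===== the bit -> index dictionary =====

theorem find_zipIdx (bl : List Nat) : ∀ (k b : Nat), b ∈ bl →
    ((bl.zipIdx k).map (fun p => (p.1, p.2))).find? (fun p => p.1 == b) =
      some (b, k + bl.idxOf b) := by
  induction bl with
  | nil => intro k b hb; simp at hb
  | cons a t ih =>
    intro k b hb
    rw [List.zipIdx_cons, List.map_cons]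
    by_cases hab : a = b
    · subst hab
      rw [List.find?_cons_of_pos (by simp)]
      simp [List.idxOf_cons_self]
    · rw [List.find?_cons_of_neg (by simp [hab])]
      have hbt : b ∈ t := by
        rcases List.mem_cons.mp hb with h | h
        · exact absurd h.symm hab
        · exact h
      rw [ih (k + 1) b hbt]
      rw [List.idxOf_cons_ne _ (by simp [hab])]
      rw [show k + (t.idxOf b + 1) = k + 1 + t.idxOf b by omega]

theorem dget_mem (bl : List Nat) (b : Nat) (hb : b ∈ bl) : dgetA bl b = bl.idxOf b := by
  unfold dgetA
  rw [show bl.zipIdx = bl.zipIdx 0 from rfl, find_zipIdx bl 0 b hb]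
  simp

theorem dget_lt (bl : List Nat) (b : Nat) (hb : b ∈ bl) : dgetA bl b < bl.length := by
  rw [dget_mem bl b hb]; exact List.idxOf_lt_length_of_mem hb

theorem dget_inj (bl : List Nat) (hn : bl.Nodup) (b c : Nat) (hb : b ∈ bl) (hc : c ∈ bl) :
    dgetA bl b = dgetA bl c ↔ b = c := by
  rw [dget_mem bl b hb, dget_mem bl c hc]
  constructor
  · intro h
    have h1 : bl[bl.idxOf b]'(List.idxOf_lt_length_of_mem hb) = b := List.getElem_idxOf _
    have h2 : bl[bl.idxOf c]'(List.idxOf_lt_length_of_mem hc) = c := List.getElem_idxOf _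
    rw [← h1, ← h2]
    congr 1
  · intro h; rw [h]

theorem dget_surj (bl : List Nat) (hn : bl.Nodup) (x : Nat) (hx : x < bl.length) :
    bl[x] ∈ bl ∧ dgetA bl bl[x] = x := by
  refine ⟨List.getElem_mem hx, ?_⟩
  rw [dget_mem bl _ (List.getElem_mem hx)]
  exact List.Nodup.idxOf_getElem hn x hx


-- ===== B-side: what one mergeStep does =====

def goodComps (bl : List Nat) (comps : List Int) : Prop :=
  (∀ c ∈ comps, 0 ≤ c ∧ c ≠ 0 ∧ ∀ j, tb c j = true → j ∈ bl) ∧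
  comps.Pairwise (fun c d => PySem.Int.band c d = 0)

def sameComp (comps : List Int) (b c : Nat) : Prop :=
  ∃ m ∈ comps, tb m b = true ∧ tb m c = true

def reachB (comps : List Int) (m : Int) (j : Nat) : Prop :=
  tb m j = true ∨ ∃ cc ∈ comps, PySem.Int.band cc m ≠ 0 ∧ tb cc j = true

theorem band_ne_zero_iff' (a b : Int) (ha : 0 ≤ a) (hb : 0 ≤ b) :
    PySem.Int.band a b ≠ 0 ↔ ∃ j, tb a j = true ∧ tb b j = true := by
  rw [ne_eq, band_eq_zero_iff a b ha hb]
  push_neg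
  constructor
  · intro ⟨j, hj⟩; exact ⟨j, hj⟩
  · intro ⟨j, h1, h2⟩; exact ⟨j, h1, h2⟩

theorem merge_fold (m : Int) (hm : 0 ≤ m) : ∀ (cs : List Int) (acc : Int) (rs : List Int),
    0 ≤ acc → (∀ c ∈ cs, 0 ≤ c) →
    cs.Pairwise (fun c d => PySem.Int.band c d = 0) →
    (∀ c ∈ cs, (PySem.Int.band c acc ≠ 0 ↔ PySem.Int.band c m ≠ 0)) →
    (cs.foldl (fun (s : Int × List Int) c =>
        if PySem.Int.band c s.1 ≠ 0 then (PySem.Int.bor s.1 c, s.2)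
        else (s.1, s.2 ++ [c])) (acc, rs)).2 =
      rs ++ cs.filter (fun c => PySem.Int.band c m == 0) ∧
    0 ≤ (cs.foldl (fun (s : Int × List Int) c =>
        if PySem.Int.band c s.1 ≠ 0 then (PySem.Int.bor s.1 c, s.2)
        else (s.1, s.2 ++ [c])) (acc, rs)).1 ∧
    ∀ j, (tb (cs.foldl (fun (s : Int × List Int) c =>
        if PySem.Int.band c s.1 ≠ 0 then (PySem.Int.bor s.1 c, s.2)
        else (s.1, s.2 ++ [c])) (acc, rs)).1 j = true ↔
      (tb acc j = true ∨ ∃ c ∈ cs, PySem.Int.band c m ≠ 0 ∧ tb c j = true)) := by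
  intro cs
  induction cs with
  | nil =>
    intro acc rs hacc _ _ _
    refine ⟨by simp, hacc, fun j => by simp⟩
  | cons c0 cs' ih =>
    intro acc rs hacc hnn hpw hiff
    have hc0 : 0 ≤ c0 := hnn c0 (List.mem_cons_self)
    have hnn' : ∀ c ∈ cs', 0 ≤ c := fun c hc => hnn c (List.mem_cons_of_mem _ hc)
    have hpw' : cs'.Pairwise (fun c d => PySem.Int.band c d = 0) := hpw.of_cons
    have hpw0 : ∀ c ∈ cs', PySem.Int.band c0 c = 0 :=
      fun c hc => List.rel_of_pairwise_cons hpw hc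
    rw [List.foldl_cons]
    by_cases h0 : PySem.Int.band c0 acc ≠ 0
    · rw [if_pos h0]
      have h0m : PySem.Int.band c0 m ≠ 0 := (hiff c0 List.mem_cons_self).mp h0
      have hacc' : 0 ≤ PySem.Int.bor acc c0 := bor_nn acc c0 hacc hc0
      have hiff' : ∀ c ∈ cs', (PySem.Int.band c (PySem.Int.bor acc c0) ≠ 0 ↔
          PySem.Int.band c m ≠ 0) := by
        intro c hc
        have hcn : 0 ≤ c := hnn' c hc
        rw [band_ne_zero_iff' c _ hcn hacc', band_ne_zero_iff' c m hcn hm]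
        constructor
        · intro ⟨j, hj1, hj2⟩
          rw [tb_bor acc c0 hacc hc0] at hj2
          rcases Bool.or_eq_true_iff.mp hj2 with hj2 | hj2
          · exact (band_ne_zero_iff' c m hcn hm).mp ((hiff c (List.mem_cons_of_mem _ hc)).mp
              ((band_ne_zero_iff' c acc hcn hacc).mpr ⟨j, hj1, hj2⟩))
          · exact absurd ⟨hj2, hj1⟩
              ((band_eq_zero_iff c0 c hc0 hcn).mp (hpw0 c hc) j)
        · intro h
          obtain ⟨j, hj1, hj2⟩ := (band_ne_zero_iff' c acc hcn hacc).mp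
            ((hiff c (List.mem_cons_of_mem _ hc)).mpr
              ((band_ne_zero_iff' c m hcn hm).mpr h))
          exact ⟨j, hj1, by rw [tb_bor acc c0 hacc hc0, hj2]; rfl⟩
      obtain ⟨r1, r2, r3⟩ := ih (PySem.Int.bor acc c0) rs hacc' hnn' hpw' hiff'
      refine ⟨?_, r2, fun j => ?_⟩
      · rw [r1, List.filter_cons]
        simp [h0m]
      · rw [r3 j]
        constructor
        · intro h
          rcases h with h | ⟨c, hc, hcm, hcj⟩
          · rw [tb_bor acc c0 hacc hc0] at h
            rcases Bool.or_eq_true_iff.mp h with h | h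
            · exact Or.inl h
            · exact Or.inr ⟨c0, List.mem_cons_self, h0m, h⟩
          · exact Or.inr ⟨c, List.mem_cons_of_mem _ hc, hcm, hcj⟩
        · intro h
          rcases h with h | ⟨c, hc, hcm, hcj⟩
          · exact Or.inl (by rw [tb_bor acc c0 hacc hc0, h]; rfl)
          · rcases List.mem_cons.mp hc with hceq | hc'
            · have hcj0 : tb c0 j = true := hceq ▸ hcj
              exact Or.inl (by rw [tb_bor acc c0 hacc hc0, hcj0]; simp)
            · exact Or.inr ⟨c, hc', hcm, hcj⟩
    · rw [if_neg h0]
      have h0m : PySem.Int.band c0 m = 0 := by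
        by_contra hcon
        exact h0 ((hiff c0 List.mem_cons_self).mpr hcon)
      obtain ⟨r1, r2, r3⟩ := ih acc (rs ++ [c0]) hacc hnn' hpw'
        (fun c hc => hiff c (List.mem_cons_of_mem _ hc))
      refine ⟨?_, r2, fun j => ?_⟩
      · rw [r1, List.filter_cons]
        simp [h0m]
      · rw [r3 j]
        constructor
        · intro h
          rcases h with h | ⟨c, hc, hcm, hcj⟩
          · exact Or.inl h
          · exact Or.inr ⟨c, List.mem_cons_of_mem _ hc, hcm, hcj⟩
        · intro h
          rcases h with h | ⟨c, hc, hcm, hcj⟩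
          · exact Or.inl h
          · rcases List.mem_cons.mp hc with hceq | hc'
            · exact absurd h0m (hceq ▸ hcm)
            · exact Or.inr ⟨c, hc', hcm, hcj⟩

theorem tb_zero (j : Nat) : tb 0 j = false := by
  unfold tb
  exact Nat.zero_testBit j

theorem band_symm_zero : Symmetric (fun c d : Int => PySem.Int.band c d = 0) := by
  intro c d h
  rwa [PySem.Int.band_comm] at h

theorem mergeStep_spec (bl : List Nat) (comps : List Int) (m : Int)
    (hg : goodComps bl comps) (hm : 0 ≤ m) (hmne : m ≠ 0)
    (hmb : ∀ j, tb m j = true → j ∈ bl) :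
    goodComps bl (mergeStep comps m) ∧
    (∀ b c, sameComp (mergeStep comps m) b c ↔
      (sameComp comps b c ∨ (reachB comps m b ∧ reachB comps m c))) ∧
    (∀ j, (tb m j = true ∨ ∃ cc ∈ comps, tb cc j = true) →
      ∃ cc ∈ mergeStep comps m, tb cc j = true) := by
  obtain ⟨hels, hpw⟩ := hg
  obtain ⟨r1, r2, r3⟩ := merge_fold m hm comps m [] hm (fun c hc => (hels c hc).1) hpw
    (fun c _ => Iff.rfl)
  have hms : mergeStep comps m =
      comps.filter (fun c => PySem.Int.band c m == 0) ++
        [(comps.foldl (fun (s : Int × List Int) c =>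
          if PySem.Int.band c s.1 ≠ 0 then (PySem.Int.bor s.1 c, s.2)
          else (s.1, s.2 ++ [c])) (m, [])).1] := by
    unfold mergeStep
    rw [r1]
    simp
  set accF := (comps.foldl (fun (s : Int × List Int) c =>
      if PySem.Int.band c s.1 ≠ 0 then (PySem.Int.bor s.1 c, s.2)
      else (s.1, s.2 ++ [c])) (m, [])).1 with haccF
  have hreach : ∀ j, reachB comps m j ↔ tb accF j = true := by
    intro j
    exact (r3 j).symm
  have haccmem : accF ∈ mergeStep comps m := by
    rw [hms]
    exact List.mem_append_right _ List.mem_cons_self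
  have hmemiff : ∀ cc, cc ∈ mergeStep comps m ↔
      (cc ∈ comps.filter (fun c => PySem.Int.band c m == 0) ∨ cc = accF) := by
    intro cc
    rw [hms, List.mem_append]
    simp
  have haccne : accF ≠ 0 := by
    obtain ⟨j, hj⟩ := tb_exists_of_ne m hm hmne
    intro hcon
    have := (r3 j).mpr (Or.inl hj)
    rw [show accF = (0:Int) from hcon, tb_zero] at this
    exact Bool.false_ne_true this
  refine ⟨⟨?_, ?_⟩, ?_, ?_⟩
  · intro c hc
    rcases (hmemiff c).mp hc with hcf | rfl
    · exact hels c (List.mem_of_mem_filter hcf)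
    · refine ⟨r2, haccne, fun j hj => ?_⟩
      rcases (r3 j).mp hj with h | ⟨cc, hcc, _, hccj⟩
      · exact hmb j h
      · exact (hels cc hcc).2.2 j hccj
  · rw [hms]
    rw [List.pairwise_append]
    refine ⟨hpw.filter _, List.pairwise_singleton _ _, ?_⟩
    intro c hcf d hd
    rcases List.mem_singleton.mp hd with rfl
    have hcm : PySem.Int.band c m = 0 := by
      have := (List.mem_filter.mp hcf).2
      simpa using this
    have hcc : c ∈ comps := List.mem_of_mem_filter hcf
    have hcn : 0 ≤ c := (hels c hcc).1
    rw [band_eq_zero_iff c accF hcn r2]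
    intro j ⟨hj1, hj2⟩
    rcases (r3 j).mp hj2 with h | ⟨cc, hccm, hccne, hccj⟩
    · exact (band_eq_zero_iff c m hcn hm).mp hcm j ⟨hj1, h⟩
    · have hne : c ≠ cc := by
        intro heq
        rw [← heq] at hccne
        exact hccne hcm
      have := List.Pairwise.forall band_symm_zero hpw hcc hccm hne
      exact (band_eq_zero_iff c cc hcn (hels cc hccm).1).mp this j ⟨hj1, hccj⟩
  · intro b c
    constructor
    · intro ⟨mm, hmm, hb, hc⟩
      rcases (hmemiff mm).mp hmm with hmf | rfl
      · exact Or.inl ⟨mm, List.mem_of_mem_filter hmf, hb, hc⟩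
      · exact Or.inr ⟨(hreach b).mpr hb, (hreach c).mpr hc⟩
    · intro h
      rcases h with ⟨cc, hcc, hb, hc⟩ | ⟨rb, rc⟩
      · by_cases hcm : PySem.Int.band cc m = 0
        · exact ⟨cc, (hmemiff cc).mpr (Or.inl (List.mem_filter.mpr ⟨hcc, by simp [hcm]⟩)), hb, hc⟩
        · refine ⟨accF, haccmem, ?_, ?_⟩
          · exact (hreach b).mp (Or.inr ⟨cc, hcc, hcm, hb⟩)
          · exact (hreach c).mp (Or.inr ⟨cc, hcc, hcm, hc⟩)
      · exact ⟨accF, haccmem, (hreach b).mp rb, (hreach c).mp rc⟩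
  · intro j hj
    rcases hj with h | ⟨cc, hcc, hccj⟩
    · exact ⟨accF, haccmem, (r3 j).mpr (Or.inl h)⟩
    · by_cases hcm : PySem.Int.band cc m = 0
      · exact ⟨cc, (hmemiff cc).mpr (Or.inl (List.mem_filter.mpr ⟨hcc, by simp [hcm]⟩)), hccj⟩
      · exact ⟨accF, haccmem, (r3 j).mpr (Or.inr ⟨cc, hcc, hcm, hccj⟩)⟩

-- ===== A-side: what one element's chain of unions does =====

def Wuf (k : Nat) (uf : UF) : Prop :=
  uf.parent.length = k ∧ ForestP uf.parent ∧ uf.count = (ncls uf.parent : Int)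

def connTo (p : List Nat) (bl : List Nat) (S : List Nat) (x : Nat) : Prop :=
  ∃ s ∈ S, rootP p x = rootP p (dgetA bl s)

theorem chain_spec (bl : List Nat) (k : Nat) (hblk : bl.length = k) :
    ∀ (S : List Nat) (uf : UF) (b0 : Nat), Wuf k uf → (∀ s ∈ S, s ∈ bl) → b0 ∈ bl →
    Wuf k (S.foldl (fun (s : UF × Int) i =>
        ((if s.2 ≠ -1 then s.1.union (dgetA bl i) (dgetA bl s.2.toNat) else s.1), (i : Int)))
        (uf, (b0 : Int))).1 ∧
    ∀ x y, (rootP (S.foldl (fun (s : UF × Int) i =>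
        ((if s.2 ≠ -1 then s.1.union (dgetA bl i) (dgetA bl s.2.toNat) else s.1), (i : Int)))
        (uf, (b0 : Int))).1.parent x =
      rootP (S.foldl (fun (s : UF × Int) i =>
        ((if s.2 ≠ -1 then s.1.union (dgetA bl i) (dgetA bl s.2.toNat) else s.1), (i : Int)))
        (uf, (b0 : Int))).1.parent y ↔
      (rootP uf.parent x = rootP uf.parent y ∨
        (connTo uf.parent bl (b0 :: S) x ∧ connTo uf.parent bl (b0 :: S) y))) := by
  intro S
  induction S with
  | nil =>
    intro uf b0 hW _ hb0
    refine ⟨hW, fun x y => ?_⟩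
    simp only [List.foldl_nil]
    constructor
    · exact fun h => Or.inl h
    · intro h
      rcases h with h | ⟨⟨t, ht, hx⟩, ⟨t', ht', hy⟩⟩
      · exact h
      · rcases List.mem_singleton.mp ht with rfl
        rcases List.mem_singleton.mp ht' with rfl
        rw [hx, hy]
  | cons s0 S' ih =>
    intro uf b0 hW hmem hb0
    obtain ⟨hlen, hF, hcnt⟩ := hW
    have hs0 : s0 ∈ bl := hmem s0 List.mem_cons_self
    have hes0 : dgetA bl s0 < uf.parent.length := by
      rw [hlen, ← hblk]; exact dget_lt bl s0 hs0
    have heb0 : dgetA bl b0 < uf.parent.length := by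
      rw [hlen, ← hblk]; exact dget_lt bl b0 hb0
    rw [List.foldl_cons]
    rw [if_pos (by omega : ((b0 : Nat) : Int) ≠ -1)]
    rw [show ((b0 : Nat) : Int).toNat = b0 from Int.toNat_natCast b0]
    set uf1 := uf.union (dgetA bl s0) (dgetA bl b0) with huf1
    obtain ⟨u1, u2, u3, u4, rr, hrr, hdesc⟩ :=
      union_spec uf (dgetA bl s0) (dgetA bl b0) hF hcnt hes0 heb0
    have hW1 : Wuf k uf1 := ⟨by rw [← huf1] at u2; rw [u2, hlen], by rw [← huf1] at u3; exact u3,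
      by rw [← huf1] at u4; exact u4⟩
    obtain ⟨hWr, hiff⟩ := ih uf1 s0 hW1 (fun s hs => hmem s (List.mem_cons_of_mem _ hs)) hs0
    refine ⟨hWr, fun x y => ?_⟩
    rw [hiff x y]
    -- abbreviations
    have hM : ∀ z, rootP uf1.parent z =
        if rootP uf.parent z = rootP uf.parent (dgetA bl s0) ∨
           rootP uf.parent z = rootP uf.parent (dgetA bl b0)
        then rr else rootP uf.parent z := by
      intro z
      rw [huf1]
      exact hdesc z
    have hA : ∀ z w, rootP uf1.parent z = rootP uf1.parent w ↔
        (rootP uf.parent z = rootP uf.parent w ∨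
          ((rootP uf.parent z = rootP uf.parent (dgetA bl s0) ∨
            rootP uf.parent z = rootP uf.parent (dgetA bl b0)) ∧
           (rootP uf.parent w = rootP uf.parent (dgetA bl s0) ∨
            rootP uf.parent w = rootP uf.parent (dgetA bl b0)))) := by
      intro z w
      rw [hM z, hM w]
      by_cases hz : rootP uf.parent z = rootP uf.parent (dgetA bl s0) ∨
          rootP uf.parent z = rootP uf.parent (dgetA bl b0) <;>
        by_cases hw : rootP uf.parent w = rootP uf.parent (dgetA bl s0) ∨
          rootP uf.parent w = rootP uf.parent (dgetA bl b0)
      · simp only [if_pos hz, if_pos hw]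
        constructor
        · intro _; exact Or.inr ⟨hz, hw⟩
        · intro _; trivial
      · simp only [if_pos hz, if_neg hw]
        constructor
        · intro h
          exfalso
          apply hw
          rcases hrr with h1 | h1 <;> rw [← h] <;> [left; right] <;> exact h1
        · intro h
          rcases h with h | ⟨_, h2⟩
          · exfalso; apply hw; rcases hz with h1 | h1 <;> rw [← h] <;> [left; right] <;> exact h1
          · exact absurd h2 hw
      · simp only [if_neg hz, if_pos hw]
        constructor
        · intro h
          exfalso
          apply hz
          rcases hrr with h1 | h1 <;> rw [h] <;> [left; right] <;> exact h1
        · intro h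
          rcases h with h | ⟨h2, _⟩
          · exfalso; apply hz; rcases hw with h1 | h1 <;> rw [h] <;> [left; right] <;> exact h1
          · exact absurd h2 hz
      · simp only [if_neg hz, if_neg hw]
        constructor
        · intro h; exact Or.inl h
        · intro h
          rcases h with h | ⟨h2, _⟩
          · exact h
          · exact absurd h2 hz
    have hConnT : ∀ z, connTo uf1.parent bl (s0 :: S') z ↔
        connTo uf.parent bl (b0 :: s0 :: S') z := by
      intro z
      constructor
      · intro ⟨t, ht, hzt⟩
        rcases (hA z (dgetA bl t)).mp hzt with h | ⟨hMz, _⟩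
        · exact ⟨t, List.mem_cons_of_mem _ ht, h⟩
        · rcases hMz with h | h
          · exact ⟨s0, List.mem_cons_of_mem _ List.mem_cons_self, h⟩
          · exact ⟨b0, List.mem_cons_self, h⟩
      · intro ⟨t, ht, hzt⟩
        rcases List.mem_cons.mp ht with rfl | ht'
        · refine ⟨s0, List.mem_cons_self, ?_⟩
          exact (hA z (dgetA bl s0)).mpr (Or.inr ⟨Or.inr hzt, Or.inl rfl⟩)
        · exact ⟨t, ht', (hA z (dgetA bl t)).mpr (Or.inl hzt)⟩
    rw [hA x y, hConnT x, hConnT y]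
    constructor
    · intro h
      rcases h with (h | ⟨hMx, hMy⟩) | h
      · exact Or.inl h
      · refine Or.inr ⟨?_, ?_⟩
        · rcases hMx with h1 | h1
          · exact ⟨s0, List.mem_cons_of_mem _ List.mem_cons_self, h1⟩
          · exact ⟨b0, List.mem_cons_self, h1⟩
        · rcases hMy with h1 | h1
          · exact ⟨s0, List.mem_cons_of_mem _ List.mem_cons_self, h1⟩
          · exact ⟨b0, List.mem_cons_self, h1⟩
      · exact Or.inr h
    · intro h
      rcases h with h | h
      · exact Or.inl (Or.inl h)
      · exact Or.inr h

-- ===== coupling: one element, both sides =====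

def linked (bl : List Nat) (p : List Nat) (comps : List Int) : Prop :=
  ∀ b ∈ bl, ∀ c ∈ bl,
    (rootP p (dgetA bl b) = rootP p (dgetA bl c) ↔ (b = c ∨ sameComp comps b c))

def stepB (comps : List Int) (a : Int) : List Int :=
  if PySem.Int.band a mask30 = 0 then comps else mergeStep comps (PySem.Int.band a mask30)

theorem S_mem_iff (a : Int) (ha : 0 ≤ a) (j : Nat) :
    j ∈ (List.range 30).filter (fun i => pyBit a i) ↔
      tb (PySem.Int.band a mask30) j = true := by
  unfold tb
  rw [PySem.Int.band_of_nonneg ha (by rw [mask30_val]; exact Int.natCast_nonneg _),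
    Int.toNat_natCast]
  rw [show mask30.toNat = 2 ^ 30 - 1 by decide]
  rw [Nat.testBit_and, Nat.testBit_two_pow_sub_one]
  rw [List.mem_filter, List.mem_range, pyBit_eq_testBit a ha j]
  constructor
  · intro ⟨h1, h2⟩; simp [h1, h2]
  · intro h
    have := Bool.and_eq_true_iff.mp h
    exact ⟨by simpa using this.2, this.1⟩

theorem stepA_eq_foldS (bl : List Nat) (uf : UF) (a : Int) :
    stepA bl uf a = (((List.range 30).filter (fun i => pyBit a i)).foldl
      (fun (s : UF × Int) i =>
        ((if s.2 ≠ -1 then s.1.union (dgetA bl i) (dgetA bl s.2.toNat) else s.1), (i : Int)))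
      (uf, -1)).1 := by
  unfold stepA
  rw [List.foldl_filter]

theorem step_couple (bl : List Nat) (k : Nat) (hnd : bl.Nodup) (hblk : bl.length = k)
    (uf : UF) (comps : List Int) (a : Int) (ha : 0 ≤ a)
    (hbl : ∀ j, tb (PySem.Int.band a mask30) j = true → j ∈ bl)
    (hW : Wuf k uf) (hL : linked bl uf.parent comps) (hG : goodComps bl comps) :
    Wuf k (stepA bl uf a) ∧ linked bl (stepA bl uf a).parent (stepB comps a) ∧
      goodComps bl (stepB comps a) ∧
      (∀ j, ((∃ cc ∈ comps, tb cc j = true) ∨ tb (PySem.Int.band a mask30) j = true) →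
        ∃ cc ∈ stepB comps a, tb cc j = true) := by
  have hmnn : 0 ≤ PySem.Int.band a mask30 :=
    band_nn a mask30 ha (by rw [mask30_val]; exact Int.natCast_nonneg _)
  by_cases hm0 : PySem.Int.band a mask30 = 0
  · have hSnil : (List.range 30).filter (fun i => pyBit a i) = [] := by
      rw [List.eq_nil_iff_forall_not_mem]
      intro j hj
      have := (S_mem_iff a ha j).mp hj
      rw [hm0, tb_zero] at this
      exact Bool.false_ne_true this
    have hstep : stepA bl uf a = uf := by rw [stepA_eq_foldS, hSnil]; rfl
    have hB : stepB comps a = comps := by unfold stepB; rw [if_pos hm0]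
    rw [hstep, hB]
    refine ⟨hW, hL, hG, fun j hj => ?_⟩
    rcases hj with h | h
    · exact h
    · rw [hm0, tb_zero] at h; exact absurd h Bool.false_ne_true
  · have hmne : PySem.Int.band a mask30 ≠ 0 := hm0
    obtain ⟨j0, hj0⟩ := tb_exists_of_ne _ hmnn hmne
    have hj0S : j0 ∈ (List.range 30).filter (fun i => pyBit a i) := (S_mem_iff a ha j0).mpr hj0
    obtain ⟨b0, S1, hScons⟩ : ∃ b0 S1, (List.range 30).filter (fun i => pyBit a i) = b0 :: S1 := by
      cases hS : (List.range 30).filter (fun i => pyBit a i) with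
      | nil => rw [hS] at hj0S; exact absurd hj0S (List.not_mem_nil)
      | cons b0 S1 => exact ⟨b0, S1, rfl⟩
    have hSmem : ∀ s ∈ b0 :: S1, s ∈ bl := by
      intro s hs
      rw [← hScons] at hs
      exact hbl s ((S_mem_iff a ha s).mp hs)
    have hb0bl : b0 ∈ bl := hSmem b0 List.mem_cons_self
    have hstep : stepA bl uf a = ((S1.foldl
        (fun (s : UF × Int) i =>
          ((if s.2 ≠ -1 then s.1.union (dgetA bl i) (dgetA bl s.2.toNat) else s.1), (i : Int)))
        (uf, (b0 : Int)))).1 := by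
      rw [stepA_eq_foldS, hScons, List.foldl_cons]
      rfl
    obtain ⟨hWr, hiff⟩ := chain_spec bl k hblk S1 uf b0 hW
      (fun s hs => hSmem s (List.mem_cons_of_mem _ hs)) hb0bl
    obtain ⟨hG', hSC, hCov⟩ := mergeStep_spec bl comps (PySem.Int.band a mask30) hG hmnn hmne hbl
    have hB : stepB comps a = mergeStep comps (PySem.Int.band a mask30) := by
      unfold stepB; rw [if_neg hm0]
    have hConn : ∀ b, b ∈ bl → (connTo uf.parent bl (b0 :: S1) (dgetA bl b) ↔
        reachB comps (PySem.Int.band a mask30) b) := by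
      intro b hbbl
      constructor
      · intro ⟨t, ht, hbt⟩
        have htbl : t ∈ bl := hSmem t ht
        have htS : tb (PySem.Int.band a mask30) t = true := by
          rw [← S_mem_iff a ha t, hScons]; exact ht
        rcases (hL b hbbl t htbl).mp hbt with rfl | ⟨cc, hcc, hcb, hct⟩
        · exact Or.inl htS
        · refine Or.inr ⟨cc, hcc, ?_, hcb⟩
          exact (band_ne_zero_iff' cc _ (hG.1 cc hcc).1 hmnn).mpr ⟨t, hct, htS⟩
      · intro h
        rcases h with h | ⟨cc, hcc, hccm, hcb⟩
        · refine ⟨b, ?_, rfl⟩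
          rw [← hScons]
          exact (S_mem_iff a ha b).mpr h
        · obtain ⟨t, hct, htm⟩ := (band_ne_zero_iff' cc _ (hG.1 cc hcc).1 hmnn).mp hccm
          have htS : t ∈ b0 :: S1 := by rw [← hScons]; exact (S_mem_iff a ha t).mpr htm
          have htbl : t ∈ bl := hSmem t htS
          exact ⟨t, htS, (hL b hbbl t htbl).mpr (Or.inr ⟨cc, hcc, hcb, hct⟩)⟩
    rw [hstep, hB]
    refine ⟨hWr, ?_, hG', fun j hj => hCov j (by tauto)⟩
    intro b hb c hc
    rw [hiff (dgetA bl b) (dgetA bl c), hSC b c]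
    rw [hL b hb c hc, hConn b hb, hConn c hc]
    tauto

-- ===== the run over the whole list, and the final count =====

theorem connAux_cons_ne (comps : List Int) (a : Int) (t : List Int) (ha : a ≠ 0) :
    connAux comps (a :: t) = connAux (stepB comps a) t := by
  unfold connAux stepB
  rw [if_neg (by simpa using ha)]
  by_cases hm : PySem.Int.band a mask30 = 0
  · rw [if_pos hm, if_pos hm]
    cases t <;> rfl
  · rw [if_neg hm, if_neg hm]
    cases t <;> rfl

theorem run_couple (bl : List Nat) (k : Nat) (hnd : bl.Nodup) (hblk : bl.length = k) :
    ∀ (rest : List Int) (uf : UF) (comps : List Int),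
    Wuf k uf → linked bl uf.parent comps → goodComps bl comps →
    (∀ a ∈ rest, 0 ≤ a ∧ a ≠ 0 ∧ ∀ j, tb (PySem.Int.band a mask30) j = true → j ∈ bl) →
    connAux comps rest = some (rest.foldl stepB comps) ∧
    Wuf k (rest.foldl (stepA bl) uf) ∧
    linked bl (rest.foldl (stepA bl) uf).parent (rest.foldl stepB comps) ∧
    goodComps bl (rest.foldl stepB comps) ∧
    (∀ j, ((∃ cc ∈ comps, tb cc j = true) ∨
        (∃ a ∈ rest, tb (PySem.Int.band a mask30) j = true)) →
      ∃ cc ∈ rest.foldl stepB comps, tb cc j = true) := by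
  intro rest
  induction rest with
  | nil =>
    intro uf comps hW hL hG _
    refine ⟨rfl, hW, hL, hG, fun j hj => ?_⟩
    rcases hj with h | ⟨a, ha, _⟩
    · exact h
    · exact absurd ha (List.not_mem_nil)
  | cons a t ih =>
    intro uf comps hW hL hG hall
    obtain ⟨ha0, hane, habl⟩ := hall a List.mem_cons_self
    obtain ⟨sW, sL, sG, sCov⟩ := step_couple bl k hnd hblk uf comps a ha0 habl hW hL hG
    obtain ⟨r0, r1, r2, r3, r4⟩ := ih (stepA bl uf a) (stepB comps a) sW sL sG
      (fun a' ha' => hall a' (List.mem_cons_of_mem _ ha'))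
    rw [List.foldl_cons, List.foldl_cons]
    refine ⟨by rw [connAux_cons_ne comps a t hane]; exact r0, r1, r2, r3, fun j hj => ?_⟩
    apply r4 j
    rcases hj with h | ⟨a', ha', hj'⟩
    · exact Or.inl (sCov j (Or.inl h))
    · rcases List.mem_cons.mp ha' with hq | ha''
      · exact Or.inl (sCov j (Or.inr (hq ▸ hj')))
      · exact Or.inr ⟨a', ha'', hj'⟩

theorem init_spec (k : Nat) : Wuf k (UF.init k) ∧ ∀ x, rootP (UF.init k).parent x = x := by
  have hpg : ∀ x, pget (List.range k) x = x := by
    intro x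
    unfold pget List.getD
    by_cases hx : x < k
    · rw [List.getElem?_eq_getElem (by simpa using hx)]
      simp
    · rw [List.getElem?_eq_none (by simpa using hx)]
      rfl
  have hroot : ∀ x, rootP (List.range k) x = x := fun x => rootP_of_isRoot _ x (hpg x)
  have hB : BoundsP (List.range k) := by
    intro x hx
    rw [hpg x]
    exact hx
  have hncls : ncls (List.range k) = k := by
    unfold ncls
    rw [Finset.image_congr (fun x _ => hroot x)]
    simp
  refine ⟨⟨by simp [UF.init], ⟨hB, fun x => ⟨0, hpg x⟩⟩, ?_⟩, hroot⟩
  show (k : Int) = (ncls (List.range k) : Int)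
  rw [hncls]

theorem card_image_eq_of_fiber (S : Finset Nat) (f g : Nat → Nat)
    (h : ∀ x ∈ S, ∀ y ∈ S, (f x = f y ↔ g x = g y)) :
    (S.image f).card = (S.image g).card := by
  induction S using Finset.induction_on with
  | empty => simp
  | insert a S' ha ih =>
    rw [Finset.image_insert, Finset.image_insert]
    have hmem : f a ∈ S'.image f ↔ g a ∈ S'.image g := by
      simp only [Finset.mem_image]
      constructor
      · intro ⟨b, hb, hfb⟩
        exact ⟨b, hb, ((h b (Finset.mem_insert_of_mem hb) a (Finset.mem_insert_self a S')).mp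
          hfb)⟩
      · intro ⟨b, hb, hgb⟩
        exact ⟨b, hb, ((h b (Finset.mem_insert_of_mem hb) a (Finset.mem_insert_self a S')).mpr
          hgb)⟩
    have ih' := ih (fun x hx y hy =>
      h x (Finset.mem_insert_of_mem hx) y (Finset.mem_insert_of_mem hy))
    by_cases hf : f a ∈ S'.image f
    · rw [Finset.insert_eq_self.mpr hf, Finset.insert_eq_self.mpr (hmem.mp hf), ih']
    · rw [Finset.card_insert_of_notMem hf,
        Finset.card_insert_of_notMem (fun hg => hf (hmem.mpr hg)), ih']

theorem count_eq (bl : List Nat) (k : Nat) (hnd : bl.Nodup) (hblk : bl.length = k)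
    (p : List Nat) (hplen : p.length = k) (comps : List Int)
    (hL : linked bl p comps) (hG : goodComps bl comps)
    (hcov : ∀ b ∈ bl, ∃ cc ∈ comps, tb cc b = true) : ncls p = comps.length := by
  have huniq : ∀ (b : Nat) (s t : Nat) (hs : s < comps.length) (ht : t < comps.length),
      tb comps[s] b = true → tb comps[t] b = true → s = t := by
    intro b s t hs ht hsb htb
    by_contra hne
    have hpw := List.pairwise_iff_getElem.mp hG.2
    rcases Nat.lt_or_ge s t with h | h
    · have := hpw s t hs ht h
      exact (band_eq_zero_iff _ _ (hG.1 _ (List.getElem_mem hs)).1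
        (hG.1 _ (List.getElem_mem ht)).1).mp this b ⟨hsb, htb⟩
    · have hlt : t < s := by omega
      have := hpw t s ht hs hlt
      exact (band_eq_zero_iff _ _ (hG.1 _ (List.getElem_mem ht)).1
        (hG.1 _ (List.getElem_mem hs)).1).mp this b ⟨htb, hsb⟩
  have hcidx : ∀ b ∈ bl, comps.findIdx (fun cc => tb cc b) < comps.length := by
    intro b hb
    apply List.findIdx_lt_length_of_exists
    obtain ⟨cc, hcc, hccb⟩ := hcov b hb
    exact ⟨cc, hcc, hccb⟩
  have hcspec : ∀ (b : Nat) (h : comps.findIdx (fun cc => tb cc b) < comps.length),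
      tb (comps[comps.findIdx (fun cc => tb cc b)]'h) b = true :=
    fun b h => by simpa using List.findIdx_getElem (w := h)
  unfold ncls
  rw [hplen]
  rw [card_image_eq_of_fiber (Finset.range k) (rootP p)
    (fun x => comps.findIdx (fun cc => tb cc (bl.getD x 0)))
    ?_]
  · -- image of the component-index map is range comps.length
    have himg : (Finset.range k).image
        (fun x => comps.findIdx (fun cc => tb cc (bl.getD x 0))) =
        Finset.range comps.length := by
      apply Finset.Subset.antisymm
      · intro t ht
        obtain ⟨x, hx, hxt⟩ := Finset.mem_image.mp ht
        have hxk : x < k := Finset.mem_range.mp hx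
        have hbx : bl.getD x 0 ∈ bl := by
          unfold List.getD
          rw [List.getElem?_eq_getElem (by omega)]
          exact List.getElem_mem _
        rw [Finset.mem_range, ← hxt]
        exact hcidx _ hbx
      · intro t ht
        have htl : t < comps.length := Finset.mem_range.mp ht
        obtain ⟨j, hj⟩ := tb_exists_of_ne comps[t] (hG.1 _ (List.getElem_mem htl)).1
          (hG.1 _ (List.getElem_mem htl)).2.1
        have hjbl : j ∈ bl := (hG.1 _ (List.getElem_mem htl)).2.2 j hj
        obtain ⟨x, hxk, hxj⟩ := List.mem_iff_getElem.mp hjbl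
        refine Finset.mem_image.mpr ⟨x, Finset.mem_range.mpr (by omega), ?_⟩
        have hbx : bl.getD x 0 = j := by
          unfold List.getD
          rw [List.getElem?_eq_getElem hxk]
          simpa using hxj
        rw [hbx]
        have hlt := hcidx j hjbl
        exact huniq j _ t hlt htl (hcspec j hlt) hj
    rw [himg, Finset.card_range]
  · -- equal fibers
    intro x hx y hy
    have hxk : x < k := Finset.mem_range.mp hx
    have hyk : y < k := Finset.mem_range.mp hy
    have hbx : bl.getD x 0 = bl[x]'(by omega) := by
      unfold List.getD
      rw [List.getElem?_eq_getElem (by omega)]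
      rfl
    have hby : bl.getD y 0 = bl[y]'(by omega) := by
      unfold List.getD
      rw [List.getElem?_eq_getElem (by omega)]
      rfl
    obtain ⟨hbxm, hex⟩ := dget_surj bl hnd x (by omega)
    obtain ⟨hbym, hey⟩ := dget_surj bl hnd y (by omega)
    have hfx : rootP p x = rootP p (dgetA bl (bl[x]'(by omega))) := by rw [hex]
    have hfy : rootP p y = rootP p (dgetA bl (bl[y]'(by omega))) := by rw [hey]
    show rootP p x = rootP p y ↔
      List.findIdx (fun cc => tb cc (bl.getD x 0)) comps =
        List.findIdx (fun cc => tb cc (bl.getD y 0)) comps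
    rw [hfx, hfy, hbx, hby]
    rw [hL _ hbxm _ hbym]
    have hbXbl : bl[x]'(by omega) ∈ bl := hbxm
    have hbYbl : bl[y]'(by omega) ∈ bl := hbym
    have hltx := hcidx _ hbXbl
    have hlty := hcidx _ hbYbl
    have hspecx := hcspec _ hltx
    have hspecy := hcspec _ hlty
    constructor
    · intro h
      rcases h with h | ⟨cc, hcc, hcb, hcc2⟩
      · rw [h]
      · obtain ⟨t, htl, hct⟩ := List.mem_iff_getElem.mp hcc
        have e1 := huniq _ _ t hltx htl hspecx (by rw [hct]; exact hcb)
        have e2 := huniq _ _ t hlty htl hspecy (by rw [hct]; exact hcc2)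
        rw [e1, e2]
    · intro h
      by_cases hbc : bl[x]'(by omega) = bl[y]'(by omega)
      · exact Or.inl hbc
      · refine Or.inr ⟨comps[comps.findIdx (fun cc => tb cc (bl[x]'(by omega)))]'hltx,
          List.getElem_mem _, hspecx, ?_⟩
        have heq2 : comps[comps.findIdx (fun cc => tb cc (bl[x]'(by omega)))]'hltx =
            comps[comps.findIdx (fun cc => tb cc (bl[y]'(by omega)))]'hlty := by
          congr 1
        rw [heq2]
        exact hspecy

theorem connAux_none (xs : List Int) : ∀ (comps : List Int), (∃ a ∈ xs, a = 0) →
    connAux comps xs = none := by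
  induction xs with
  | nil => intro comps ⟨a, ha, _⟩; exact absurd ha (List.not_mem_nil)
  | cons a t ih =>
    intro comps ⟨b, hb, hb0⟩
    by_cases ha0 : a = 0
    · unfold connAux
      rw [if_pos (by simpa using ha0)]
    · rw [connAux_cons_ne comps a t ha0]
      apply ih
      rcases List.mem_cons.mp hb with rfl | hbt
      · exact absurd hb0 ha0
      · exact ⟨b, hbt, hb0⟩

theorem natCast_beq_one (n : Nat) : (((n : Int)) == 1) = (n == 1) := by
  rcases eq_or_ne n 1 with rfl | hne
  · simp
  · have : ((n : Int)) ≠ 1 := by exact_mod_cast hne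
    simp [hne, this]

theorem conn_eq (L : List Int) (h : ∀ a ∈ L, 0 ≤ a) : isConnA L = connB L := by
  by_cases hz : L.any (fun a => a == 0)
  · have hA : isConnA L = false := by
      unfold isConnA
      rw [if_pos hz]
    have hzz : ∃ a ∈ L, a = 0 := by
      obtain ⟨a, ha, ha0⟩ := List.any_eq_true.mp hz
      exact ⟨a, ha, by simpa using ha0⟩
    have hB : connB L = false := by
      unfold connB
      rw [connAux_none L [] hzz]
    rw [hA, hB]
  · have hnz : ∀ a ∈ L, a ≠ 0 := by
      intro a ha ha0
      exact (List.any_eq_false.mp (Bool.eq_false_iff.mpr hz)) a ha (by simpa using ha0)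
    set bl := bitsA L with hbl
    have hnd : bl.Nodup := by
      rw [hbl]
      unfold bitsA
      exact (List.nodup_range).filter _
    obtain ⟨hW0, hroot0⟩ := init_spec bl.length
    have hL0 : linked bl (UF.init bl.length).parent [] := by
      intro b hb c hc
      rw [hroot0 (dgetA bl b), hroot0 (dgetA bl c)]
      rw [dget_inj bl hnd b c hb hc]
      constructor
      · exact fun h' => Or.inl h'
      · intro h'
        rcases h' with h' | ⟨mm, hmm, _⟩
        · exact h'
        · exact absurd hmm (List.not_mem_nil)
    have hG0 : goodComps bl [] := ⟨fun c hc => absurd hc (List.not_mem_nil), List.Pairwise.nil⟩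
    have hall : ∀ a ∈ L, 0 ≤ a ∧ a ≠ 0 ∧
        ∀ j, tb (PySem.Int.band a mask30) j = true → j ∈ bl := by
      intro a ha
      refine ⟨h a ha, hnz a ha, fun j hj => ?_⟩
      rw [tb_mask a (h a ha) j] at hj
      obtain ⟨h1, h2⟩ := Bool.and_eq_true_iff.mp hj
      rw [hbl]
      unfold bitsA
      rw [List.mem_filter, List.mem_range]
      refine ⟨by simpa using h2, ?_⟩
      apply List.any_eq_true.mpr
      exact ⟨a, ha, by rw [pyBit_eq_testBit a (h a ha) j]; exact h1⟩
    obtain ⟨r0, r1, r2, r3, r4⟩ := run_couple bl bl.length hnd rfl L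
      (UF.init bl.length) [] hW0 hL0 hG0 hall
    have hcov : ∀ b ∈ bl, ∃ cc ∈ L.foldl stepB [], tb cc b = true := by
      intro b hb
      apply r4 b
      right
      rw [hbl] at hb
      unfold bitsA at hb
      rw [List.mem_filter, List.mem_range] at hb
      obtain ⟨hb30, hany⟩ := hb
      obtain ⟨a, ha, hpb⟩ := List.any_eq_true.mp hany
      refine ⟨a, ha, ?_⟩
      rw [tb_mask a (h a ha) b]
      rw [pyBit_eq_testBit a (h a ha) b] at hpb
      simp [hpb, hb30]
    have hcnt := count_eq bl bl.length hnd rfl (L.foldl (stepA bl) (UF.init bl.length)).parent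
      r1.1 (L.foldl stepB []) r2 r3 hcov
    have hA : isConnA L = ((L.foldl (stepA bl) (UF.init bl.length)).count == 1) := by
      unfold isConnA
      rw [if_neg hz]
    have hB : connB L = ((L.foldl stepB []).length == 1) := by
      unfold connB
      rw [r0]
    rw [hA, hB, r1.2.2, hcnt, natCast_beq_one]

-- ===== outer structure: zero fixing, the ±1 search, the lsb scan =====

theorem fixZeros_eq (A : List Int) :
    fixZeros A = (((A.filter (fun a => a ≤ 0)).length : Int),
      A.map (fun a => if a > 0 then a else 1)) := by
  induction A with
  | nil => rfl
  | cons a t ih =>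
    unfold fixZeros
    rw [ih]
    by_cases ha : a > 0
    · rw [if_pos ha, List.filter_cons, List.map_cons, if_pos ha]
      have hd : (decide (a ≤ 0)) = false := by simp; omega
      rw [hd]
      simp
    · rw [if_neg ha, List.filter_cons, List.map_cons, if_neg ha]
      have hd : (decide (a ≤ 0)) = true := by simp; omega
      rw [hd]
      refine Prod.ext ?_ rfl
      simp

theorem cand_eq (L : List Int) (i : Nat) (hi : i < L.length) (v : Int) :
    L.take i ++ [v] ++ L.drop (i + 1) = L.set i v := by
  rw [List.set_eq_take_cons_drop v hi, List.append_assoc, List.singleton_append]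

theorem set_nonneg (L : List Int) (hL : ∀ a ∈ L, 1 ≤ a) (i : Nat) (v : Int) (hv : 0 ≤ v) :
    ∀ a ∈ L.set i v, 0 ≤ a := by
  intro a ha
  rcases List.mem_or_eq_of_mem_set ha with h | rfl
  · have := hL a h; omega
  · exact hv

theorem getD_ge_one (L : List Int) (hL : ∀ a ∈ L, 1 ≤ a) (i : Nat) (hi : i < L.length) :
    1 ≤ L.getD i 0 := by
  have h1 : L.getD i 0 = L[i]'hi := by
    unfold List.getD
    rw [List.getElem?_eq_getElem hi]
    rfl
  rw [h1]
  exact hL _ (List.getElem_mem hi)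

theorem search_eq (L : List Int) (hL : ∀ a ∈ L, 1 ≤ a) :
    ∀ (f i : Nat), i + f ≤ L.length → searchA L i f = searchB L i f := by
  intro f
  induction f with
  | zero => intro i _; rfl
  | succ f ih =>
    intro i hif
    have hi : i < L.length := by omega
    have ha1 : 1 ≤ L.getD i 0 := getD_ge_one L hL i hi
    simp only [searchA, searchB]
    rw [cand_eq L i hi (L.getD i 0 - 1), cand_eq L i hi (L.getD i 0 + 1)]
    rw [← conn_eq (L.set i (L.getD i 0 - 1)) (set_nonneg L hL i _ (by omega))]
    rw [← conn_eq (L.set i (L.getD i 0 + 1)) (set_nonneg L hL i _ (by omega))]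
    by_cases h1 : isConnA (L.set i (L.getD i 0 - 1))
    · rw [if_pos h1, if_pos h1]
    · rw [if_neg h1, if_neg h1]
      by_cases h2 : isConnA (L.set i (L.getD i 0 + 1))
      · rw [if_pos h2, if_pos h2]
      · rw [if_neg h2, if_neg h2]
        exact ih (i + 1) (by omega)

theorem lsbStep_eval (s : Int × List Nat) (q1 : Int) (q2 : Nat) :
    lsbStep s (q1, q2) =
      if PySem.Int.band q1 (-q1) > s.1 then (PySem.Int.band q1 (-q1), [q2])
      else if PySem.Int.band q1 (-q1) = s.1 then (s.1, s.2 ++ [q2])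
      else s := by
  simp only [lsbStep]
  by_cases h1 : PySem.Int.band q1 (-q1) > s.1
  · rw [if_pos h1, if_pos h1]
    simp
  · rw [if_neg h1, if_neg h1]

theorem lsbfold (l : List Int) (hl : ∀ a ∈ l, 1 ≤ a) : l ≠ [] →
    (l.zipIdx.foldl lsbStep (-1, [])).1 ∈ l.map (fun b => PySem.Int.band b (-b)) ∧
    (∀ y ∈ l.map (fun b => PySem.Int.band b (-b)),
      y ≤ (l.zipIdx.foldl lsbStep (-1, [])).1) ∧
    (l.zipIdx.foldl lsbStep (-1, [])).2 =
      ((l.map (fun b => PySem.Int.band b (-b))).zipIdx.filter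
        (fun q => q.1 == (l.zipIdx.foldl lsbStep (-1, [])).1)).map Prod.snd := by
  induction l using List.reverseRecOn with
  | nil => intro h; exact absurd rfl h
  | append_singleton l b ihl =>
    intro _
    have hb : 1 ≤ b := hl b (by simp)
    have hlsb : 0 ≤ PySem.Int.band b (-b) :=
      PySem.Int.band_nonneg_of_nonneg_left (-b) (by omega)
    have hzip : (l ++ [b]).zipIdx = l.zipIdx ++ [(b, l.length)] := by
      rw [List.zipIdx_append]
      simp [List.zipIdx_cons]
    have hmap : (l ++ [b]).map (fun x => PySem.Int.band x (-x)) =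
        l.map (fun x => PySem.Int.band x (-x)) ++ [PySem.Int.band b (-b)] := by
      rw [List.map_append]
      rfl
    have hmzip : ((l ++ [b]).map (fun x => PySem.Int.band x (-x))).zipIdx =
        (l.map (fun x => PySem.Int.band x (-x))).zipIdx ++
          [(PySem.Int.band b (-b), l.length)] := by
      rw [hmap, List.zipIdx_append]
      simp [List.zipIdx_cons]
    rw [hzip, List.foldl_append, List.foldl_cons, List.foldl_nil]
    by_cases hl0 : l = []
    · subst hl0
      rw [show (([] : List Int).zipIdx.foldl lsbStep (-1, [])) = ((-1 : Int), ([] : List Nat))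
          from rfl]
      rw [lsbStep_eval]
      simp only []
      rw [if_pos (by simpa using (by omega : ((-1 : Int) < PySem.Int.band b (-b))))]
      refine ⟨by simp, ?_, ?_⟩
      · intro y hy
        simp at hy
        omega
      · simp [List.zipIdx_cons, List.filter_cons]
    · obtain ⟨hmem, hmax, hidx⟩ := ihl (fun a ha => hl a (List.mem_append_left _ ha)) hl0
      set F := l.zipIdx.foldl lsbStep (-1, []) with hF
      have hMnn : 0 ≤ F.1 := by
        obtain ⟨x, hx, hxe⟩ := List.mem_map.mp hmem
        have := hl x (List.mem_append_left _ hx)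
        rw [← hxe]
        exact PySem.Int.band_nonneg_of_nonneg_left (-x) (by omega)
      rw [lsbStep_eval]
      rcases lt_trichotomy F.1 (PySem.Int.band b (-b)) with hc | hc | hc
      · rw [if_pos (by simpa using hc)]
        refine ⟨by rw [hmap]; simp, ?_, ?_⟩
        · intro y hy
          rw [hmap] at hy
          rcases List.mem_append.mp hy with h | h
          · have := hmax y h
            omega
          · simp at h
            omega
        · rw [hmzip, List.filter_append]
          have hfilt : (l.map (fun x => PySem.Int.band x (-x))).zipIdx.filter
              (fun q => q.1 == PySem.Int.band b (-b)) = [] := by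
            rw [List.filter_eq_nil_iff]
            intro q hq
            have := hmax q.1 (List.fst_mem_of_mem_zipIdx hq)
            simp
            omega
          rw [hfilt, List.filter_cons]
          simp
      · rw [if_neg (by simpa using (by omega : ¬(F.1 < PySem.Int.band b (-b)))), if_pos hc.symm]
        refine ⟨by rw [hmap]; exact List.mem_append_left _ hmem, ?_, ?_⟩
        · intro y hy
          rw [hmap] at hy
          rcases List.mem_append.mp hy with h | h
          · exact hmax y h
          · simp at h
            omega
        · rw [hmzip, List.filter_append, hidx, List.filter_cons]
          have : (PySem.Int.band b (-b) == F.1) = true := by simpa using hc.symm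
          rw [this]
          simp
      · rw [if_neg (by simpa using (by omega : ¬(F.1 < PySem.Int.band b (-b)))),
          if_neg (by omega)]
        refine ⟨by rw [hmap]; exact List.mem_append_left _ hmem, ?_, ?_⟩
        · intro y hy
          rw [hmap] at hy
          rcases List.mem_append.mp hy with h | h
          · exact hmax y h
          · simp at h
            omega
        · rw [hmzip, List.filter_append, hidx, List.filter_cons]
          have : (PySem.Int.band b (-b) == F.1) = false := by
            simp
            omega
          rw [this]
          simp

theorem max_getD_eq (l : List Int) (hne : l ≠ []) (m : Int) (hmem : m ∈ l)
    (hmax : ∀ y ∈ l, y ≤ m) : (PySem.List.max? l (fun x => x)).getD 0 = m := by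
  cases h : PySem.List.max? l (fun x => x) with
  | none => exact absurd ((PySem.List.max?_eq_none_iff l (fun x => x)).mp h) hne
  | some m2 =>
    have h1 : m2 ∈ l := PySem.List.max?_mem h
    have h2 : ∀ y ∈ l, y ≤ m2 := fun y hy => by
      have := PySem.List.max?_isMax h y hy
      simpa using this
    have : m2 = m := le_antisymm (hmax m2 h1) (h2 m hmem)
    rw [this]
    rfl

theorem solve_eq_alt (N : Int) (A : List Int) (hPre : A ≠ []) : solve N A = solve_alt N A := by
  unfold solve solve_alt
  rw [fixZeros_eq]
  simp only []
  set M := A.map (fun a => if a > 0 then a else 1) with hM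
  have hpos : ∀ a ∈ M, 1 ≤ a := by
    intro a ha
    rw [hM] at ha
    obtain ⟨x, _, hxe⟩ := List.mem_map.mp ha
    rw [← hxe]
    by_cases hx : x > 0
    · rw [if_pos hx]; omega
    · rw [if_neg hx]
  have hnn : ∀ a ∈ M, 0 ≤ a := fun a ha => le_trans (by omega) (hpos a ha)
  rw [conn_eq M hnn]
  by_cases hc : connB M
  · rw [if_pos hc, if_pos hc]
  · rw [if_neg hc, if_neg hc]
    rw [search_eq M hpos M.length 0 (by omega)]
    cases hs : searchB M 0 M.length with
    | some c => rfl
    | none =>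
      simp only []
      have hMne : M ≠ [] := by
        rw [hM]
        simpa using hPre
      obtain ⟨hmem, hmax, hidx⟩ := lsbfold M hpos hMne
      have hmx : (PySem.List.max? (M.map (fun b => PySem.Int.band b (-b)))
          (fun x => x)).getD 0 = (M.zipIdx.foldl lsbStep (-1, [])).1 := by
        apply max_getD_eq
        · simpa using hMne
        · exact hmem
        · exact hmax
      rw [hmx, ← hidx]
      by_cases hl1 : (M.zipIdx.foldl lsbStep (-1, [])).2.length = 1
      · rw [if_pos hl1, if_pos (by simp [hl1])]
      · rw [if_neg hl1, if_neg (by simp [hl1])]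

-- ===== VERDICT (by name: the statement is the Claim_ definition above) =====
theorem solve_spec : Claim_equal_solve := by
  intro N A hDom hPre
  unfold Spec_solve
  exact solve_eq_alt N A hPre
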